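-- pv_equiv track=rewrite | github.com/tinylabs/fan_controller | code16/analyze_model16.py | separable_fit
-- ===== SOURCE A (Python) =====
-- from collections import defaultdict, Counter
--
-- def separable_fit(rows):
--     """
--     Try cw16 = base_s XOR Δ(mask) with Δ independent of speed.
--     Return (ok, base_run, base_off, deltas_run, deltas_off)
--     """
--     # Learn deltas for run using pairwise equations across all run speeds
--     run = [r for r in rows if 1 <= r['speed'] <= 10]
--     off = [r for r in rows if r['speed'] == 0]
--
--     def solve_deltas(group):
--         # Build rows: for fixed speed pairs: cw_i XOR cw_j = Δ · (ai XOR aj)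
--         X, Ybits = [], []
--         by_s = defaultdict(list)
--         for r in group:
--             by_s[r['speed']].append(r)
--         for s, lst in by_s.items():
--             if len(lst) < 2: continue
--             ref = lst[0]
--             ar, cr = ref['addr'], ref['cw16']
--             for g in lst[1:]:
--                 a, c = g['addr'], g['cw16']
--                 m = a ^ ar
--                 if m == 0: continue
--                 X.append([m & 1, (m>>1)&1, (m>>2)&1])  # a0,a1,a2
--                 y = c ^ cr
--                 Ybits.append([(y >> (15-k)) & 1 for k in range(16)])
--         if len(X) < 3: return None
--         # Solve each bit; require consistency
--         deltas = [0,0,0]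
--         for k in range(16):
--             # 3 unknowns, Gaussian elim GF(2)
--             A = [X[i][:] + [Ybits[i][k]] for i in range(len(X))]
--             m, n = len(A), 3
--             r = c = 0; piv=[-1]*n
--             while r<m and c<n:
--                 pr = next((i for i in range(r,m) if A[i][c]&1), None)
--                 if pr is None: c+=1; continue
--                 A[r],A[pr]=A[pr],A[r]; piv[c]=r
--                 for i in range(m):
--                     if i!=r and (A[i][c]&1):
--                         for kk in range(c, n+1):
--                             A[i][kk] ^= A[r][kk]
--                 r+=1; c+=1
--             # contradiction?
--             for i in range(r,m):
--                 if (A[i][0]|A[i][1]|A[i][2])==0 and (A[i][3]&1):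
--                     return None
--             # back-sub
--             x=[0,0,0]
--             for j in range(n-1,-1,-1):
--                 if piv[j]!=-1:
--                     ssum=A[piv[j]][n]
--                     for kk in range(j+1,n):
--                         ssum ^= (A[piv[j]][kk] & x[kk])
--                     x[j]=ssum&1
--             # set bit k into deltas
--             for j in range(3):
--                 deltas[j] = (deltas[j] << 1) | x[j]
--         return deltas
--
--     d_run = solve_deltas(run)
--     d_off = solve_deltas(off)
--
--     if d_run is None:
--         return (False, {}, None, None, None)
--
--     # Build bases: base = cw ^ (Δ · addr)
--     def addr_mask(deltas, addr):
--         out=0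
--         for i in range(3):
--             if (addr>>i)&1: out ^= deltas[i]
--         return out
--
--     base_run = {}
--     for s in range(1,11):
--         rr = [r for r in run if r['speed']==s]
--         if not rr: continue
--         b = rr[0]['cw16'] ^ addr_mask(d_run, rr[0]['addr'])
--         base_run[s] = b
--         # verify all others
--         for r in rr[1:]:
--             if (b ^ addr_mask(d_run, r['addr'])) != r['cw16']:
--                 return (False, {}, None, None, None)
--
--     base_off = None
--     if off:
--         if d_off is None:
--             return (False, {}, None, None, None)
--         base_off = off[0]['cw16'] ^ addr_mask(d_off, off[0]['addr'])
--         for r in off[1:]: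
--             if (base_off ^ addr_mask(d_off, r['addr'])) != r['cw16']:
--                 return (False, {}, None, None, None)
--
--     return (True, base_run, base_off, d_run, d_off)
-- ===== SOURCE B (Python) =====
-- def separable_fit(rows):
--     """
--     Try cw16 = base_s XOR delta(mask) with delta independent of speed.
--     Return (ok, base_run, base_off, deltas_run, deltas_off)
--
--     Gauss-Jordan over (mask, rhs) pairs: each pairwise equation is one
--     2-tuple (3-bit coefficient mask, 16-bit RHS), one pivot pair is pulled
--     out per column and XORed wholesale out of every other pair; the deltas
--     are read straight off the fully reduced pivot pairs (no matrix, no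
--     per-bit solves, no back-substitution).
--     """
--     run = [r for r in rows if 1 <= r['speed'] <= 10]
--     off = [r for r in rows if r['speed'] == 0]
--
--     def group_by_speed(group):
--         by_s = {}
--         for r in group:
--             by_s.setdefault(r['speed'], []).append(r)
--         return by_s
--
--     def solve_deltas(group):
--         eqs = []
--         for lst in group_by_speed(group).values():
--             if len(lst) < 2:
--                 continue
--             ref = lst[0]
--             for g in lst[1:]:
--                 m = g['addr'] ^ ref['addr']
--                 if m == 0:
--                     continue
--                 eqs.append((m % 8, (g['cw16'] ^ ref['cw16']) % 0x10000))
--         if len(eqs) < 3: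
--             return None
--         pivs = []          # (column, (mask, rhs)) pivot pairs, kept fully reduced
--         rest = eqs
--         for c in range(3):
--             idx = next((i for i, (m, _) in enumerate(rest) if (m >> c) & 1), None)
--             if idx is None:
--                 continue
--             pm, py = rest[idx]
--             rest[idx] = rest[0]
--             rest = rest[1:]
--             pivs = [(pc, (m ^ pm, y ^ py) if (m >> c) & 1 else (m, y))
--                     for pc, (m, y) in pivs]
--             rest = [(m ^ pm, y ^ py) if (m >> c) & 1 else (m, y)
--                     for m, y in rest]
--             pivs.append((c, (pm, py)))
--         if any(y for _, y in rest):
--             return None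
--         x = [0, 0, 0]
--         for c, (_, y) in pivs:
--             x[c] = y
--         return x
--
--     d_run = solve_deltas(run)
--     d_off = solve_deltas(off)
--
--     if d_run is None:
--         return (False, {}, None, None, None)
--
--     def addr_mask(deltas, addr):
--         out = 0
--         for i in range(3):
--             if (addr >> i) & 1:
--                 out ^= deltas[i]
--         return out
--
--     run_groups = group_by_speed(run)
--     base_run = {}
--     for s in range(1, 11):
--         rr = run_groups.get(s)
--         if not rr:
--             continue
--         b = rr[0]['cw16'] ^ addr_mask(d_run, rr[0]['addr'])
--         if not all((b ^ addr_mask(d_run, r['addr'])) == r['cw16'] for r in rr[1:]):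
--             return (False, {}, None, None, None)
--         base_run[s] = b
--
--     base_off = None
--     if off:
--         if d_off is None:
--             return (False, {}, None, None, None)
--         base_off = off[0]['cw16'] ^ addr_mask(d_off, off[0]['addr'])
--         if not all((base_off ^ addr_mask(d_off, r['addr'])) == r['cw16'] for r in off[1:]):
--             return (False, {}, None, None, None)
--
--     return (True, base_run, base_off, d_run, d_off)
-- ===== Notes on version B (the rewrite author's own statement) =====
-- stated objective: alternative
-- what changed: A builds a per-bit equation matrix (rows of 3 coefficient bits plus a 16-column Ybits table) and runs 16 separate Gaussian eliminations with row swaps, a pivot-index array and per-bit back-substitution, reassembling the deltas bit by bit; B represents each pairwise equation as a single (3-bit mask, 16-bit rhs) integer pair and runs ONE Gauss-Jordan pass that pulls one pivot pair per column out of the worklist and XORs it wholesale out of every other pair, reading the three deltas directly off the fully reduced pivot pairs with no matrix, no per-bit solves and no back-substitution; …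
import Mathlib
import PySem

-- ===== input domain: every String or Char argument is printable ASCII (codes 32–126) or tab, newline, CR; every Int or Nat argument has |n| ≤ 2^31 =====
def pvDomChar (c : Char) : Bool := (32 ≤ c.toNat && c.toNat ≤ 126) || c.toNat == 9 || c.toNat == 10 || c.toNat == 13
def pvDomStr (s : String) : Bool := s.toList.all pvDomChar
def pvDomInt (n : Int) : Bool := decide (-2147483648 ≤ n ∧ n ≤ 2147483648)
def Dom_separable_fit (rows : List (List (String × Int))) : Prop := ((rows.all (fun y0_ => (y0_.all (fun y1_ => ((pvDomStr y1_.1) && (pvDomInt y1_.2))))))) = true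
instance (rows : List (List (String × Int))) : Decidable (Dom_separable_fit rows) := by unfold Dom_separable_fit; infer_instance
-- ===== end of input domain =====

-- B replaces A's 16 per-bit matrix Gaussian eliminations (plus back-substitution)
-- by ONE Gauss-Jordan pass over (3-bit mask, 16-bit RHS) integer pairs, reading the
-- deltas straight off the fully reduced pivot pairs; same return value on Pre_.

-- ===== PORT A =====
-- shared getters (dict lookup r[k]; Pre_ guarantees the key is present)
def pvGet (r : List (String × Int)) (k : String) : Int := (PySem.Dict.mk r).getD k 0
def pvRow (M : List (List Int)) (i : Nat) : List Int := M.getD i []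
def pvEntry (M : List (List Int)) (i j : Nat) : Int := (M.getD i []).getD j 0

-- grouping `by_s[r['speed']].append(r)` (defaultdict in A, setdefault in B: same loop)
def pvGroupBySpeed (g : List (List (String × Int))) : PySem.Dict Int (List (List (String × Int))) :=
  g.foldl (fun d r => d.modify (pvGet r "speed") [] (· ++ [r])) PySem.Dict.empty

-- A's GF(2) elimination `while r<m and c<n:` over the per-bit row matrix
def pvXorFrom (c : Nat) (a b : List Int) : List Int :=
  (List.range' c (4 - c)).foldl (fun acc kk => acc.set kk (PySem.Int.bxor (acc.getD kk 0) (b.getD kk 0))) a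

def pvSwap (M : List (List Int)) (r pr : Nat) : List (List Int) :=
  (M.set r (pvRow M pr)).set pr (pvRow M r)

def pvElimCol (M : List (List Int)) (m r c : Nat) : List (List Int) :=
  (List.range m).foldl (fun Mx i =>
    if i ≠ r ∧ PySem.Int.band (pvEntry Mx i c) 1 ≠ 0
    then Mx.set i (pvXorFrom c (pvRow Mx i) (pvRow Mx r)) else Mx) M

def pvFindPiv (M : List (List Int)) (r m c : Nat) : Option Nat :=
  (List.range' r (m - r)).find? (fun i => PySem.Int.band (pvEntry M i c) 1 != 0)

def gElim (M : List (List Int)) (m r c : Nat) (piv : List Int) : List (List Int) × Nat × List Int :=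
  if r < m then
    if _h : c < 3 then
      match pvFindPiv M r m c with
      | none => gElim M m r (c+1) piv
      | some pr => gElim (pvElimCol (pvSwap M r pr) m r c) m (r+1) (c+1) (piv.set c (r : Int))
    else (M, r, piv)
  else (M, r, piv)
termination_by 3 - c
decreasing_by all_goals omega

-- `base = cw ^ (Δ·addr)`: identical helper in both sources
def pvMask (deltas : List Int) (addr : Int) : Int :=
  (List.range 3).foldl (fun out (i : Nat) =>
    if PySem.Int.band (addr >>> i) 1 ≠ 0 then PySem.Int.bxor out (deltas.getD i 0) else out) 0

-- A's equation construction: X rows of 3 mask bits, Ybits rows of the 16 rhs bits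
def pvStepA (st : List (List Int) × List (List Int)) (lst : List (List (String × Int))) :
    List (List Int) × List (List Int) :=
  if lst.length < 2 then st else
  match lst with
  | [] => st
  | ref :: rest =>
    rest.foldl (fun st2 g =>
      let mv := PySem.Int.bxor (pvGet g "addr") (pvGet ref "addr")
      if mv = 0 then st2 else
      (st2.1 ++ [[PySem.Int.band mv 1, PySem.Int.band (mv >>> (1:Nat)) 1, PySem.Int.band (mv >>> (2:Nat)) 1]],
       st2.2 ++ [(List.range 16).map (fun (k : Nat) =>
         PySem.Int.band ((PySem.Int.bxor (pvGet g "cw16") (pvGet ref "cw16")) >>> (15 - k)) 1)])) st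

def pvContraA (M : List (List Int)) (m r : Nat) : Bool :=
  (List.range' r (m - r)).any (fun i =>
    (PySem.Int.bor (PySem.Int.bor (pvEntry M i 0) (pvEntry M i 1)) (pvEntry M i 2) == 0) &&
    (PySem.Int.band (pvEntry M i 3) 1 != 0))

def pvBackA (M : List (List Int)) (piv : List Int) : List Int :=
  ([2,1,0] : List Nat).foldl (fun x j =>
    if piv.getD j 0 ≠ -1 then
      x.set j (PySem.Int.band ((List.range' (j+1) (3 - (j+1))).foldl
        (fun s kk => PySem.Int.bxor s (PySem.Int.band (pvEntry M (piv.getD j 0).toNat kk) (x.getD kk 0)))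
        (pvEntry M (piv.getD j 0).toNat 3)) 1)
    else x) [0,0,0]

-- `deltas[j] = (deltas[j] << 1) | x[j]`
def pvAsm (ds x : List Int) : List Int :=
  (List.range 3).foldl (fun d j => d.set j (PySem.Int.bor ((d.getD j 0) <<< (1:Nat)) (x.getD j 0))) ds

def pvSolveA (group : List (List (String × Int))) : Option (List Int) :=
  let XY := (pvGroupBySpeed group).items.foldl (fun st p => pvStepA st p.2) ([], [])
  if XY.1.length < 3 then none else
  (List.range 16).foldl (fun acc k =>
    match acc with
    | none => none
    | some ds =>
      let m := XY.1.length
      let Ak := (List.range m).map (fun i => (XY.1.getD i []) ++ [(XY.2.getD i []).getD k 0])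
      let res := gElim Ak m 0 0 [-1,-1,-1]
      if pvContraA res.1 m res.2.1 then none
      else some (pvAsm ds (pvBackA res.1 res.2.2))) (some [0,0,0])

def separable_fit (rows : List (List (String × Int))) :
    Bool × (List (Int × Int)) × Option Int × Option (List Int) × Option (List Int) :=
  let run := rows.filter (fun r => decide (1 ≤ pvGet r "speed" ∧ pvGet r "speed" ≤ 10))
  let off := rows.filter (fun r => pvGet r "speed" == 0)
  let d_run := pvSolveA run
  let d_off := pvSolveA off
  match d_run with
  | none => (false, [], none, none, none)
  | some dr =>
    let st := (List.range' 1 10).foldl (fun acc s =>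
      match acc with
      | none => none
      | some br =>
        match run.filter (fun r => pvGet r "speed" == (s : Int)) with
        | [] => some br
        | r0 :: rest =>
          let b := PySem.Int.bxor (pvGet r0 "cw16") (pvMask dr (pvGet r0 "addr"))
          let br1 := br.insert (s : Int) b
          if rest.all (fun r => PySem.Int.bxor b (pvMask dr (pvGet r "addr")) == pvGet r "cw16")
          then some br1 else none) (some PySem.Dict.empty)
    match st with
    | none => (false, [], none, none, none)
    | some br =>
      match off with
      | [] => (true, br.items, none, some dr, d_off)
      | o0 :: orest =>
        match d_off with
        | none => (false, [], none, none, none)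
        | some doff =>
          let b0 := PySem.Int.bxor (pvGet o0 "cw16") (pvMask doff (pvGet o0 "addr"))
          if orest.all (fun r => PySem.Int.bxor b0 (pvMask doff (pvGet r "addr")) == pvGet r "cw16")
          then (true, br.items, some b0, some dr, some doff)
          else (false, [], none, none, none)

-- ===== PORT B =====
-- `(m ^ pm, y ^ py) if (m >> c) & 1 else (m, y)` — XOR one pivot pair out of another pair
def bRedc (c : Nat) (p q : Int × Int) : Int × Int :=
  if PySem.Int.band (q.1 >>> c) 1 ≠ 0 then (PySem.Int.bxor q.1 p.1, PySem.Int.bxor q.2 p.2) else q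

-- B's equation construction: one (3-bit mask, 16-bit rhs) pair per row pair
def bEqs (eqs : List (Int × Int)) (lst : List (List (String × Int))) : List (Int × Int) :=
  if lst.length < 2 then eqs else
  match lst with
  | [] => eqs
  | ref :: rest =>
    rest.foldl (fun e g =>
      let mv := PySem.Int.bxor (pvGet g "addr") (pvGet ref "addr")
      if mv = 0 then e else
      e ++ [(PySem.Int.mod mv 8,
             PySem.Int.mod (PySem.Int.bxor (pvGet g "cw16") (pvGet ref "cw16")) 65536)]) eqs

-- one column of B's Gauss-Jordan: pull the first pair with bit c set out of `rest`
-- (its slot is refilled with the old head, the head is dropped), XOR it wholesale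
-- out of every kept pivot pair and every remaining pair, then record it as pivot c
def bStep (st : List (Nat × Int × Int) × List (Int × Int)) (c : Nat) :
    List (Nat × Int × Int) × List (Int × Int) :=
  match st.2.findIdx? (fun q : Int × Int => PySem.Int.band (q.1 >>> c) 1 != 0) with
  | none => st
  | some idx =>
    let p := st.2.getD idx (0, 0)
    (st.1.map (fun pr => (pr.1, bRedc c p pr.2)) ++ [(c, p)],
     ((st.2.set idx (st.2.getD 0 (0, 0))).drop 1).map (bRedc c p))

def pvSolveB (group : List (List (String × Int))) : Option (List Int) :=
  let eqs := (pvGroupBySpeed group).values.foldl bEqs []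
  if eqs.length < 3 then none else
  let st := ([0, 1, 2] : List Nat).foldl bStep ([], eqs)
  if st.2.any (fun q => q.2 != 0) then none
  else some (st.1.foldl (fun x pr => x.set pr.1 pr.2.2) [0, 0, 0])

def separable_fit_alt (rows : List (List (String × Int))) :
    Bool × (List (Int × Int)) × Option Int × Option (List Int) × Option (List Int) :=
  let run := rows.filter (fun r => decide (1 ≤ pvGet r "speed" ∧ pvGet r "speed" ≤ 10))
  let off := rows.filter (fun r => pvGet r "speed" == 0)
  let d_run := pvSolveB run
  let d_off := pvSolveB off
  match d_run with
  | none => (false, [], none, none, none)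
  | some dr =>
    let groups := pvGroupBySpeed run
    let st := (List.range' 1 10).foldl (fun acc s =>
      match acc with
      | none => none
      | some br =>
        match groups.getD (s : Int) [] with
        | [] => some br
        | r0 :: rest =>
          let b := PySem.Int.bxor (pvGet r0 "cw16") (pvMask dr (pvGet r0 "addr"))
          if rest.all (fun r => PySem.Int.bxor b (pvMask dr (pvGet r "addr")) == pvGet r "cw16")
          then some (br.insert (s : Int) b) else none) (some PySem.Dict.empty)
    match st with
    | none => (false, [], none, none, none)
    | some br =>
      match off with
      | [] => (true, br.items, none, some dr, d_off)
      | o0 :: orest =>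
        match d_off with
        | none => (false, [], none, none, none)
        | some doff =>
          let b0 := PySem.Int.bxor (pvGet o0 "cw16") (pvMask doff (pvGet o0 "addr"))
          if orest.all (fun r => PySem.Int.bxor b0 (pvMask doff (pvGet r "addr")) == pvGet r "cw16")
          then (true, br.items, some b0, some dr, some doff)
          else (false, [], none, none, none)

-- ===== PRECONDITION & SPEC =====
-- Pre_ excludes rows missing the 'speed' key (A raises KeyError there) and, whenever some
-- speed group is large enough that A's equation-building or base-building may read them,
-- rows missing 'addr'/'cw16' (A raises KeyError except in some degenerate group shapes
-- that return early before touching those keys).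
def Pre_separable_fit (rows : List (List (String × Int))) : Prop :=
  (∀ r ∈ rows, ((PySem.Dict.mk r).get? "speed").isSome) ∧
  (¬ ((rows.filter (fun r => decide (1 ≤ pvGet r "speed" ∧ pvGet r "speed" ≤ 10))).map
        (fun r => pvGet r "speed")).Nodup →
    ∀ r ∈ rows.filter (fun r => decide (1 ≤ pvGet r "speed" ∧ pvGet r "speed" ≤ 10)),
      ((PySem.Dict.mk r).get? "addr").isSome ∧ ((PySem.Dict.mk r).get? "cw16").isSome) ∧
  ((2 ≤ (rows.filter (fun r => pvGet r "speed" == 0)).length ∨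
      (¬ ((rows.filter (fun r => decide (1 ≤ pvGet r "speed" ∧ pvGet r "speed" ≤ 10))).map
            (fun r => pvGet r "speed")).Nodup ∧
        rows.filter (fun r => pvGet r "speed" == 0) ≠ [])) →
    ∀ r ∈ rows.filter (fun r => pvGet r "speed" == 0),
      ((PySem.Dict.mk r).get? "addr").isSome ∧ ((PySem.Dict.mk r).get? "cw16").isSome)
instance (rows : List (List (String × Int))) : Decidable (Pre_separable_fit rows) := by
  unfold Pre_separable_fit; infer_instance

def pvWitness_separable_fit : (List (List (String × Int))) :=
  [[("speed", 1), ("addr", 0), ("cw16", 5)], [("speed", 0), ("addr", 1), ("cw16", 7)]]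

def Spec_separable_fit (rows : List (List (String × Int)))
    (out : Bool × (List (Int × Int)) × Option Int × Option (List Int) × Option (List Int)) : Prop :=
  out = separable_fit_alt rows
instance (rows : List (List (String × Int)))
    (out : Bool × (List (Int × Int)) × Option Int × Option (List Int) × Option (List Int)) :
    Decidable (Spec_separable_fit rows out) := by unfold Spec_separable_fit; infer_instance

-- ===== CLAIM (what is proved, stated in full; the proofs are below) =====
def Claim_equal_separable_fit : Prop :=
  ∀ (rows : List (List (String × Int))), Dom_separable_fit rows → Pre_separable_fit rows →
    Spec_separable_fit rows (separable_fit rows)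

-- ===== LEMMAS AND PROOFS =====

-- ---- middle layer (proof-internal): A's elimination with the 16 RHS bits batched
-- into one 16-bit integer column; layer 1 proves pvSolveA = pvSolveM, layer 2 proves
-- pvSolveM = pvSolveB.
def pvStepM (eqs : List (List Int)) (lst : List (List (String × Int))) : List (List Int) :=
  if lst.length < 2 then eqs else
  match lst with
  | [] => eqs
  | ref :: rest =>
    rest.foldl (fun e2 g =>
      let mv := PySem.Int.bxor (pvGet g "addr") (pvGet ref "addr")
      if mv = 0 then e2 else
      e2 ++ [[PySem.Int.band mv 1, PySem.Int.band (mv >>> (1:Nat)) 1, PySem.Int.band (mv >>> (2:Nat)) 1,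
              PySem.Int.mod (PySem.Int.bxor (pvGet g "cw16") (pvGet ref "cw16")) 65536]]) eqs

def pvContraM (M : List (List Int)) (m r : Nat) : Bool :=
  (List.range' r (m - r)).any (fun i =>
    (PySem.Int.bor (PySem.Int.bor (pvEntry M i 0) (pvEntry M i 1)) (pvEntry M i 2) == 0) &&
    (pvEntry M i 3 != 0))

def pvBackM (M : List (List Int)) (piv : List Int) : List Int :=
  ([2,1,0] : List Nat).foldl (fun x j =>
    if piv.getD j 0 ≠ -1 then
      x.set j ((List.range' (j+1) (3 - (j+1))).foldl
        (fun t kk => if PySem.Int.band (pvEntry M (piv.getD j 0).toNat kk) 1 ≠ 0 then PySem.Int.bxor t (x.getD kk 0) else t)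
        (pvEntry M (piv.getD j 0).toNat 3))
    else x) [0,0,0]

def pvSolveM (group : List (List (String × Int))) : Option (List Int) :=
  let eqs := (pvGroupBySpeed group).values.foldl pvStepM []
  if eqs.length < 3 then none else
  let res := gElim eqs eqs.length 0 0 [-1,-1,-1]
  if pvContraM res.1 eqs.length res.2.1 then none
  else some (pvBackM res.1 res.2.2)

def pvBitf (s : Nat) (y : Int) : Int := PySem.Int.band (y >>> s) 1

theorem pvBitf_arith (s : Nat) (y : Int) : pvBitf s y = (y / ((2:Int)^s)) % 2 := by
  unfold pvBitf
  rw [PySem.Int.band_one, PySem.Int.mod_eq_emod_of_pos (by omega), Int.shiftRight_eq_div_pow]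
  push_cast
  ring_nf

theorem pvBitf_bounds (s : Nat) (y : Int) : 0 ≤ pvBitf s y ∧ pvBitf s y < 2 := by
  rw [pvBitf_arith]; constructor
  · exact Int.emod_nonneg _ (by omega)
  · exact Int.emod_lt_of_pos _ (by omega)

theorem pvBitf_mod65536 (s : Nat) (hs : s < 16) (y : Int) :
    pvBitf s (PySem.Int.mod y 65536) = pvBitf s y := by
  rw [pvBitf_arith, pvBitf_arith, PySem.Int.mod_eq_emod_of_pos (by omega)]
  interval_cases s <;> omega

theorem pvBitf_natCast (s : Nat) (n : Nat) : pvBitf s (n : Int) = ((n >>> s) &&& 1 : Nat) := by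
  unfold pvBitf
  rw [← Int.natCast_shiftRight]
  have := PySem.Int.band_natCast (n >>> s) 1
  exact_mod_cast this

theorem pvBitf_zero (s : Nat) : pvBitf s 0 = 0 := by
  have := pvBitf_natCast s 0
  simpa using this

theorem pvBitf_bxor (s : Nat) {a b : Int} (ha : 0 ≤ a) (hb : 0 ≤ b) :
    pvBitf s (PySem.Int.bxor a b) = PySem.Int.bxor (pvBitf s a) (pvBitf s b) := by
  rw [PySem.Int.bxor_of_nonneg ha hb]
  obtain ⟨an, rfl⟩ := Int.eq_ofNat_of_zero_le ha
  obtain ⟨bn, rfl⟩ := Int.eq_ofNat_of_zero_le hb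
  simp only [Int.toNat_natCast]
  rw [pvBitf_natCast, pvBitf_natCast, pvBitf_natCast]
  rw [PySem.Int.bxor_natCast]
  congr 1
  rw [Nat.shiftRight_xor_distrib, Nat.and_xor_distrib_right]

theorem pvBxor_bounds {a b : Int} (ha : 0 ≤ a) (ha2 : a < 65536) (hb : 0 ≤ b) (hb2 : b < 65536) :
    0 ≤ PySem.Int.bxor a b ∧ PySem.Int.bxor a b < 65536 := by
  rw [PySem.Int.bxor_of_nonneg ha hb]
  have h : a.toNat ^^^ b.toNat < 65536 := by
    have : (65536 : Nat) = 2 ^ 16 := by norm_num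
    rw [this]
    exact Nat.xor_lt_two_pow (by omega) (by omega)
  omega

theorem natBit_toNat (n i : Nat) : ((n >>> i) &&& 1) = (n.testBit i).toNat := by
  rw [Nat.testBit, Nat.and_one_is_mod]
  rcases Nat.mod_two_eq_zero_or_one (n >>> i) with h | h <;> rw [h] <;> simp [h]

theorem pvExistsBit {y : Int} (h0 : 0 ≤ y) (h1 : y < 65536) :
    (y ≠ 0 ↔ ∃ s, s < 16 ∧ pvBitf s y = 1) := by
  obtain ⟨n, rfl⟩ := Int.eq_ofNat_of_zero_le h0
  constructor
  · intro hy
    have hne : n ≠ 0 := by exact_mod_cast hy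
    obtain ⟨i, hi⟩ := Nat.exists_testBit_of_ne_zero hne
    have hi16 : i < 16 := by
      by_contra hc
      have hlt : n < 2 ^ i := by
        calc n < 65536 := by exact_mod_cast h1
        _ = 2 ^ 16 := by norm_num
        _ ≤ 2 ^ i := Nat.pow_le_pow_right (by omega) (by omega)
      rw [Nat.testBit_lt_two_pow hlt] at hi
      exact Bool.false_ne_true hi
    refine ⟨i, hi16, ?_⟩
    rw [pvBitf_natCast, natBit_toNat, hi]
    rfl
  · rintro ⟨s, hs, hb⟩ hz
    have hn0 : n = 0 := by exact_mod_cast hz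
    subst hn0
    rw [show ((0:Nat):Int) = 0 by rfl, pvBitf_zero] at hb
    omega

theorem two_mul_or_one (m : ℕ) : (2*m) ||| 1 = 2*m + 1 := by
  apply Nat.eq_of_testBit_eq; intro i
  cases i with
  | zero =>
    rw [Nat.testBit_or]
    simp [Nat.testBit_zero]
  | succ j =>
    rw [Nat.testBit_succ, Nat.testBit_succ]
    have h1 : (2*m ||| 1) / 2 = m := by
      have h := Nat.shiftRight_or_distrib (a := 2*m) (b := 1) (i := 1)
      simp [Nat.shiftRight_succ, Nat.shiftRight_zero] at h
      omega
    rw [h1]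
    congr 1
    omega

theorem pvAsmStep {x : Int} (hx : 0 ≤ x) (s : Nat) :
    PySem.Int.bor ((x >>> (s+1)) <<< (1:Nat)) (pvBitf s x) = x >>> s := by
  obtain ⟨n, rfl⟩ := Int.eq_ofNat_of_zero_le hx
  rw [← Int.natCast_shiftRight, ← Int.natCast_shiftRight, pvBitf_natCast]
  have hsl : ((n >>> (s+1) : Nat) : Int) <<< (1:Nat) = (((n >>> (s+1)) <<< 1 : Nat) : Int) := by
    rw [Int.shiftLeft_eq, Nat.shiftLeft_eq]
    push_cast; ring
  rw [hsl, PySem.Int.bor_natCast]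
  congr 1
  simp only [Nat.shiftLeft_eq, Nat.and_one_is_mod, Nat.shiftRight_eq_div_pow]
  have hdd : n / 2 ^ (s+1) = n / 2 ^ s / 2 := by
    rw [pow_succ, ← Nat.div_div_eq_div_mul]
  rw [hdd]
  set q := n / 2 ^ s with hq
  rcases Nat.even_or_odd q with he | ho
  · have h2 : q % 2 = 0 := Nat.even_iff.mp he
    rw [h2, Nat.or_zero]
    omega
  · have h2 : q % 2 = 1 := Nat.odd_iff.mp ho
    rw [h2]
    have h3 : q / 2 * 2 ^ 1 = 2 * (q / 2) := by ring
    rw [h3, two_mul_or_one]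
    omega

-- ===== structural layer (A vs middle) =====
def pvSlice (s : Nat) (e : List Int) : List Int := e.take 3 ++ [pvBitf s (e.getD 3 0)]

def RowWF (e : List Int) : Prop :=
  e.length = 4 ∧ (e.getD 0 0 = 0 ∨ e.getD 0 0 = 1) ∧ (e.getD 1 0 = 0 ∨ e.getD 1 0 = 1) ∧
  (e.getD 2 0 = 0 ∨ e.getD 2 0 = 1) ∧ 0 ≤ e.getD 3 0 ∧ e.getD 3 0 < 65536

def MatWF (M : List (List Int)) : Prop := ∀ e ∈ M, RowWF e

theorem rowWF_shape {e : List Int} (h : RowWF e) : ∃ a b c d : Int, e = [a,b,c,d] := by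
  obtain ⟨hl, -⟩ := h
  rcases e with _ | ⟨a, _ | ⟨b, _ | ⟨c, _ | ⟨d, _ | ⟨x, t⟩⟩⟩⟩⟩ <;> simp_all

theorem slice_shape (s : Nat) (a b c d : Int) :
    pvSlice s [a,b,c,d] = [a, b, c, pvBitf s d] := by
  simp [pvSlice]

theorem getD_map_bitf (s : Nat) (x : List Int) (k : Nat) :
    (x.map (pvBitf s)).getD k 0 = pvBitf s (x.getD k 0) := by
  rw [List.getD_eq_getElem?_getD, List.getD_eq_getElem?_getD, List.getElem?_map]
  cases h : x[k]? with
  | none => simp [pvBitf_zero]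
  | some v => simp

theorem entry_map_slice {s : Nat} {M : List (List Int)} (hWF : MatWF M) (i j : Nat) (hj : j ≤ 3) :
    pvEntry (M.map (pvSlice s)) i j =
      (if j < 3 then pvEntry M i j else pvBitf s (pvEntry M i 3)) := by
  unfold pvEntry
  simp only [List.getD_eq_getElem?_getD, List.getElem?_map]
  cases h : M[i]? with
  | none =>
    simp only [h, Option.map_none, Option.getD_none]
    split <;> simp [pvBitf_zero]
  | some e =>
    have he : e ∈ M := List.mem_of_getElem? h
    obtain ⟨a,b,c,d,rfl⟩ := rowWF_shape (hWF e he)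
    simp only [h, Option.map_some, Option.getD_some, slice_shape]
    interval_cases j <;> simp

theorem row_map_slice {s : Nat} {M : List (List Int)} (i : Nat) (hi : i < M.length) :
    pvRow (M.map (pvSlice s)) i = pvSlice s (pvRow M i) := by
  unfold pvRow
  rw [List.getD_eq_getElem?_getD, List.getD_eq_getElem?_getD, List.getElem?_map]
  rw [List.getElem?_eq_getElem hi]
  simp

theorem bxor01 {a b : Int} (ha : a = 0 ∨ a = 1) (hb : b = 0 ∨ b = 1) :
    PySem.Int.bxor a b = 0 ∨ PySem.Int.bxor a b = 1 := by
  rcases ha with rfl | rfl <;> rcases hb with rfl | rfl <;> decide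

theorem xorFrom0 (x0 x1 x2 x3 y0 y1 y2 y3 : Int) :
    pvXorFrom 0 [x0,x1,x2,x3] [y0,y1,y2,y3] =
      [PySem.Int.bxor x0 y0, PySem.Int.bxor x1 y1, PySem.Int.bxor x2 y2, PySem.Int.bxor x3 y3] := rfl

theorem xorFrom1 (x0 x1 x2 x3 y0 y1 y2 y3 : Int) :
    pvXorFrom 1 [x0,x1,x2,x3] [y0,y1,y2,y3] =
      [x0, PySem.Int.bxor x1 y1, PySem.Int.bxor x2 y2, PySem.Int.bxor x3 y3] := rfl

theorem xorFrom2 (x0 x1 x2 x3 y0 y1 y2 y3 : Int) :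
    pvXorFrom 2 [x0,x1,x2,x3] [y0,y1,y2,y3] =
      [x0, x1, PySem.Int.bxor x2 y2, PySem.Int.bxor x3 y3] := rfl

theorem rowWF_of_parts {e0 e1 e2 e3 : Int} (h0 : e0 = 0 ∨ e0 = 1) (h1 : e1 = 0 ∨ e1 = 1)
    (h2 : e2 = 0 ∨ e2 = 1) (h3 : 0 ≤ e3) (h3' : e3 < 65536) : RowWF [e0,e1,e2,e3] := by
  refine ⟨rfl, ?_, ?_, ?_, ?_, ?_⟩ <;> simp_all

theorem xorFrom_slice {a b : List Int} (ha : RowWF a) (hb : RowWF b) {c : Nat} (hc : c < 3) (s : Nat) :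
    pvXorFrom c (pvSlice s a) (pvSlice s b) = pvSlice s (pvXorFrom c a b) ∧ RowWF (pvXorFrom c a b) := by
  obtain ⟨a0,a1,a2,a3,rfl⟩ := rowWF_shape ha
  obtain ⟨b0,b1,b2,b3,rfl⟩ := rowWF_shape hb
  obtain ⟨-, ha0, ha1, ha2, ha3, ha3'⟩ := ha
  obtain ⟨-, hb0, hb1, hb2, hb3, hb3'⟩ := hb
  have ha0c : a0 = 0 ∨ a0 = 1 := ha0
  have ha1c : a1 = 0 ∨ a1 = 1 := ha1
  have ha2c : a2 = 0 ∨ a2 = 1 := ha2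
  have ha3c : (0:Int) ≤ a3 := ha3
  have ha3c' : a3 < 65536 := ha3'
  have hb0c : b0 = 0 ∨ b0 = 1 := hb0
  have hb1c : b1 = 0 ∨ b1 = 1 := hb1
  have hb2c : b2 = 0 ∨ b2 = 1 := hb2
  have hb3c : (0:Int) ≤ b3 := hb3
  have hb3c' : b3 < 65536 := hb3'
  rw [slice_shape, slice_shape]
  have hx := pvBitf_bxor s ha3c hb3c
  have hbnd := pvBxor_bounds ha3c ha3c' hb3c hb3c'
  interval_cases c
  · rw [xorFrom0, xorFrom0, slice_shape, hx]
    exact ⟨rfl, rowWF_of_parts (bxor01 ha0c hb0c) (bxor01 ha1c hb1c) (bxor01 ha2c hb2c) hbnd.1 hbnd.2⟩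
  · rw [xorFrom1, xorFrom1, slice_shape, hx]
    exact ⟨rfl, rowWF_of_parts ha0c (bxor01 ha1c hb1c) (bxor01 ha2c hb2c) hbnd.1 hbnd.2⟩
  · rw [xorFrom2, xorFrom2, slice_shape, hx]
    exact ⟨rfl, rowWF_of_parts ha0c ha1c (bxor01 ha2c hb2c) hbnd.1 hbnd.2⟩
theorem matwf_row {M : List (List Int)} (hWF : MatWF M) (i : Nat) (hi : i < M.length) :
    pvRow M i ∈ M := by
  unfold pvRow
  rw [List.getD_eq_getElem?_getD, List.getElem?_eq_getElem hi]
  exact List.getElem_mem hi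

theorem rowWF_row {M : List (List Int)} (hWF : MatWF M) (i : Nat) (hi : i < M.length) :
    RowWF (pvRow M i) := hWF _ (matwf_row hWF i hi)

theorem swap_comm (s : Nat) {M : List (List Int)} {r pr : Nat}
    (hr : r < M.length) (hpr : pr < M.length) :
    pvSwap (M.map (pvSlice s)) r pr = (pvSwap M r pr).map (pvSlice s) := by
  unfold pvSwap
  rw [row_map_slice r (by simpa using hr), row_map_slice pr (by simpa using hpr)]
  rw [List.map_set, List.map_set]

theorem swap_wf {M : List (List Int)} (hWF : MatWF M) {r pr : Nat}
    (hr : r < M.length) (hpr : pr < M.length) :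
    MatWF (pvSwap M r pr) ∧ (pvSwap M r pr).length = M.length := by
  constructor
  · intro e he
    unfold pvSwap at he
    rcases List.mem_or_eq_of_mem_set he with he2 | rfl
    · rcases List.mem_or_eq_of_mem_set he2 with he3 | rfl
      · exact hWF _ he3
      · exact rowWF_row hWF pr hpr
    · exact rowWF_row hWF r hr
  · simp [pvSwap]

theorem elim_fold (s : Nat) (r c : Nat) (hc : c < 3) :
    ∀ (I : List Nat) (M : List (List Int)), MatWF M → r < M.length → (∀ i ∈ I, i < M.length) →
    (I.foldl (fun Mx i =>
        if i ≠ r ∧ PySem.Int.band (pvEntry Mx i c) 1 ≠ 0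
        then Mx.set i (pvXorFrom c (pvRow Mx i) (pvRow Mx r)) else Mx) (M.map (pvSlice s)))
      = (I.foldl (fun Mx i =>
        if i ≠ r ∧ PySem.Int.band (pvEntry Mx i c) 1 ≠ 0
        then Mx.set i (pvXorFrom c (pvRow Mx i) (pvRow Mx r)) else Mx) M).map (pvSlice s)
    ∧ MatWF (I.foldl (fun Mx i =>
        if i ≠ r ∧ PySem.Int.band (pvEntry Mx i c) 1 ≠ 0
        then Mx.set i (pvXorFrom c (pvRow Mx i) (pvRow Mx r)) else Mx) M)
    ∧ (I.foldl (fun Mx i =>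
        if i ≠ r ∧ PySem.Int.band (pvEntry Mx i c) 1 ≠ 0
        then Mx.set i (pvXorFrom c (pvRow Mx i) (pvRow Mx r)) else Mx) M).length = M.length := by
  intro I
  induction I with
  | nil => intro M hWF hr hI; exact ⟨rfl, hWF, rfl⟩
  | cons i I ih =>
    intro M hWF hr hI
    have hi : i < M.length := hI i (List.mem_cons_self)
    simp only [List.foldl_cons]
    have hent : pvEntry (M.map (pvSlice s)) i c = pvEntry M i c := by
      rw [entry_map_slice hWF i c (by omega)]
      simp [hc]
    by_cases hcond : i ≠ r ∧ PySem.Int.band (pvEntry M i c) 1 ≠ 0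
    · have hcond' : i ≠ r ∧ PySem.Int.band (pvEntry (M.map (pvSlice s)) i c) 1 ≠ 0 := by
        rw [hent]; exact hcond
      rw [if_pos hcond', if_pos hcond]
      have hxf := xorFrom_slice (rowWF_row hWF i hi) (rowWF_row hWF r hr) hc s
      have hrow_i := row_map_slice (M := M) (s := s) i hi
      have hrow_r := row_map_slice (M := M) (s := s) r hr
      rw [hrow_i, hrow_r, hxf.1, ← List.map_set]
      have hWF' : MatWF (M.set i (pvXorFrom c (pvRow M i) (pvRow M r))) := by
        intro e he
        rcases List.mem_or_eq_of_mem_set he with he2 | rfl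
        · exact hWF _ he2
        · exact hxf.2
      have hlen' : (M.set i (pvXorFrom c (pvRow M i) (pvRow M r))).length = M.length := by simp
      have := ih (M.set i (pvXorFrom c (pvRow M i) (pvRow M r))) hWF' (by omega)
        (fun j hj => by rw [hlen']; exact hI j (List.mem_cons_of_mem _ hj))
      refine ⟨this.1, this.2.1, by rw [this.2.2, hlen']⟩
    · have hcond' : ¬ (i ≠ r ∧ PySem.Int.band (pvEntry (M.map (pvSlice s)) i c) 1 ≠ 0) := by
        rw [hent]; exact hcond
      rw [if_neg hcond', if_neg hcond]
      exact ih M hWF hr (fun j hj => hI j (List.mem_cons_of_mem _ hj))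

theorem elimCol_comm (s : Nat) {M : List (List Int)} {m r c : Nat} (hWF : MatWF M)
    (hm : M.length = m) (hr : r < m) (hc : c < 3) :
    pvElimCol (M.map (pvSlice s)) m r c = (pvElimCol M m r c).map (pvSlice s)
    ∧ MatWF (pvElimCol M m r c) ∧ (pvElimCol M m r c).length = m := by
  unfold pvElimCol
  have h := elim_fold s r c hc (List.range m) M hWF (by omega)
    (fun i hi => by rw [hm]; exact List.mem_range.mp hi)
  exact ⟨h.1, h.2.1, by rw [h.2.2, hm]⟩

theorem find?_congr' {l : List Nat} {p q : Nat → Bool} (h : ∀ a ∈ l, p a = q a) :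
    l.find? p = l.find? q := by
  induction l with
  | nil => rfl
  | cons a l ih =>
    simp only [List.find?_cons]
    rw [h a List.mem_cons_self]
    cases q a
    · exact ih (fun b hb => h b (List.mem_cons_of_mem _ hb))
    · rfl

theorem findPiv_comm (s : Nat) {M : List (List Int)} (hWF : MatWF M) (r m c : Nat) (hc : c < 3) :
    pvFindPiv (M.map (pvSlice s)) r m c = pvFindPiv M r m c := by
  unfold pvFindPiv
  apply find?_congr'
  intro i _
  rw [entry_map_slice hWF i c (by omega)]
  simp [hc]

theorem gElim_comm (s : Nat) : ∀ (n c r : Nat) (piv : List Int) (M : List (List Int)) (m : Nat),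
    3 - c ≤ n → MatWF M → M.length = m →
    gElim (M.map (pvSlice s)) m r c piv
      = ((gElim M m r c piv).1.map (pvSlice s), (gElim M m r c piv).2)
    ∧ MatWF (gElim M m r c piv).1 ∧ (gElim M m r c piv).1.length = m := by
  intro n
  induction n with
  | zero =>
    intro c r piv M m hn hWF hm
    have hc : ¬ c < 3 := by omega
    have hBv : gElim M m r c piv = (M, r, piv) := by
      rw [gElim.eq_def]; split <;> simp [hc]
    have hAv : gElim (M.map (pvSlice s)) m r c piv = (M.map (pvSlice s), r, piv) := by
      rw [gElim.eq_def]; split <;> simp [hc]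
    rw [hAv, hBv]
    exact ⟨rfl, hWF, hm⟩
  | succ n ih =>
    intro c r piv M m hn hWF hm
    by_cases hr : r < m
    · by_cases hc : c < 3
      · cases hf : pvFindPiv M r m c with
        | none =>
          have hA : gElim (M.map (pvSlice s)) m r c piv = gElim (M.map (pvSlice s)) m r (c+1) piv := by
            rw [gElim.eq_def]
            simp [hr, hc, findPiv_comm s hWF r m c hc, hf]
          have hB : gElim M m r c piv = gElim M m r (c+1) piv := by
            rw [gElim.eq_def]
            simp [hr, hc, hf]
          rw [hA, hB]
          exact ih (c+1) r piv M m (by omega) hWF hm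
        | some pr =>
          have hpr : pr < m := by
            have hmem := List.mem_of_find?_eq_some hf
            have := List.mem_range'_1.mp hmem
            omega
          have hsw := swap_wf hWF (by omega : r < M.length) (by omega : pr < M.length)
          have hswlen : (pvSwap M r pr).length = m := by rw [hsw.2, hm]
          have hec := elimCol_comm s hsw.1 hswlen hr hc
          have hA : gElim (M.map (pvSlice s)) m r c piv
              = gElim ((pvElimCol (pvSwap M r pr) m r c).map (pvSlice s)) m (r+1) (c+1) (piv.set c (r : Int)) := by
            rw [gElim.eq_def]
            simp only [hr, if_pos, findPiv_comm s hWF r m c hc, hf, hc]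
            rw [swap_comm s (by omega) (by omega), hec.1]
            simp [hr, hc]
          have hB : gElim M m r c piv
              = gElim (pvElimCol (pvSwap M r pr) m r c) m (r+1) (c+1) (piv.set c (r : Int)) := by
            rw [gElim.eq_def]
            simp [hr, hc, hf]
          rw [hA, hB]
          exact ih (c+1) (r+1) (piv.set c (r : Int)) _ m (by omega) hec.2.1 hec.2.2
      · have hBv : gElim M m r c piv = (M, r, piv) := by
          rw [gElim.eq_def]; split <;> simp [hc]
        have hAv : gElim (M.map (pvSlice s)) m r c piv = (M.map (pvSlice s), r, piv) := by
          rw [gElim.eq_def]; split <;> simp [hc]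
        rw [hAv, hBv]
        exact ⟨rfl, hWF, hm⟩
    · have hBv : gElim M m r c piv = (M, r, piv) := by
        rw [gElim.eq_def]; simp [hr]
      have hAv : gElim (M.map (pvSlice s)) m r c piv = (M.map (pvSlice s), r, piv) := by
        rw [gElim.eq_def]; simp [hr]
      rw [hAv, hBv]
      exact ⟨rfl, hWF, hm⟩
theorem entry_oob {M : List (List Int)} {p : Nat} (hp : M.length ≤ p) (j : Nat) :
    pvEntry M p j = 0 := by
  have h : M.getD p [] = [] := by
    rw [List.getD_eq_getElem?_getD, List.getElem?_eq_none (by omega)]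
    rfl
  unfold pvEntry
  rw [h]
  rfl

theorem band01v {v : Int} (h : v = 0 ∨ v = 1) : PySem.Int.band v 1 = v := by
  rcases h with rfl | rfl <;> decide

theorem coeff01 {M : List (List Int)} (hWF : MatWF M) (p kk : Nat) (hkk : kk < 3) :
    pvEntry M p kk = 0 ∨ pvEntry M p kk = 1 := by
  by_cases hp : p < M.length
  · have h := rowWF_row hWF p hp
    obtain ⟨-, h0, h1, h2, -, -⟩ := h
    interval_cases kk
    · exact h0
    · exact h1
    · exact h2
  · rw [entry_oob (by omega)]
    left; rfl

theorem entry3_bounds {M : List (List Int)} (hWF : MatWF M) (p : Nat) :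
    0 ≤ pvEntry M p 3 ∧ pvEntry M p 3 < 65536 := by
  by_cases hp : p < M.length
  · have h := rowWF_row hWF p hp
    obtain ⟨-, -, -, -, h3, h3'⟩ := h
    exact ⟨h3, h3'⟩
  · rw [entry_oob (by omega)]
    omega

theorem getDx_bounds {xB : List Int} (h : ∀ v ∈ xB, 0 ≤ v ∧ v < 65536) (kk : Nat) :
    0 ≤ xB.getD kk 0 ∧ xB.getD kk 0 < 65536 := by
  by_cases hk : kk < xB.length
  · rw [List.getD_eq_getElem _ _ hk]
    exact h _ (xB.getElem_mem hk)
  · rw [List.getD_eq_getElem?_getD, List.getElem?_eq_none (by omega)]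
    norm_num

theorem bitf01 (s : Nat) (y : Int) : pvBitf s y = 0 ∨ pvBitf s y = 1 := by
  have := pvBitf_bounds s y
  omega

-- contradiction check equivalence (A's per-bit vs the batched middle layer)
theorem contra_equiv {M : List (List Int)} (hWF : MatWF M) (m r : Nat) (hm : M.length = m) :
    (pvContraM M m r = true) ↔ (∃ k, k < 16 ∧ pvContraA (M.map (pvSlice (15 - k))) m r = true) := by
  unfold pvContraA pvContraM
  simp only [List.any_eq_true]
  constructor
  · rintro ⟨i, hi, hp⟩
    simp only [Bool.and_eq_true, beq_iff_eq, bne_iff_ne, ne_eq] at hp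
    obtain ⟨hz, hy⟩ := hp
    obtain ⟨s, hs, hbit⟩ := (pvExistsBit (entry3_bounds hWF i).1 (entry3_bounds hWF i).2).mp hy
    refine ⟨15 - s, by omega, i, hi, ?_⟩
    have h15 : 15 - (15 - s) = s := by omega
    simp only [Bool.and_eq_true, beq_iff_eq, bne_iff_ne, ne_eq]
    rw [entry_map_slice hWF i 0 (by omega), entry_map_slice hWF i 1 (by omega),
        entry_map_slice hWF i 2 (by omega), entry_map_slice hWF i 3 (by omega)]
    simp only [show (0:Nat) < 3 by omega, show (1:Nat) < 3 by omega, show (2:Nat) < 3 by omega,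
      if_pos, if_true, lt_irrefl, if_false, reduceIte]
    refine ⟨hz, ?_⟩
    rw [h15, hbit]
    decide
  · rintro ⟨k, hk, i, hi, hp⟩
    simp only [Bool.and_eq_true, beq_iff_eq, bne_iff_ne, ne_eq] at hp
    rw [entry_map_slice hWF i 0 (by omega), entry_map_slice hWF i 1 (by omega),
        entry_map_slice hWF i 2 (by omega), entry_map_slice hWF i 3 (by omega)] at hp
    simp only [show (0:Nat) < 3 by omega, show (1:Nat) < 3 by omega, show (2:Nat) < 3 by omega,
      if_pos, if_true, lt_irrefl, if_false, reduceIte] at hp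
    obtain ⟨hz, hy⟩ := hp
    refine ⟨i, hi, ?_⟩
    simp only [Bool.and_eq_true, beq_iff_eq, bne_iff_ne, ne_eq]
    refine ⟨hz, ?_⟩
    have hb := band01v (bitf01 (15 - k) (pvEntry M i 3))
    intro h0
    rw [h0, pvBitf_zero] at hy
    exact hy (by decide)

-- back-substitution: A's per-bit version on the sliced matrix vs the batched one
theorem ssum_comm (s : Nat) {M : List (List Int)} (hWF : MatWF M) (p : Nat) {xB : List Int}
    (hxB : ∀ v ∈ xB, 0 ≤ v ∧ v < 65536) :
    ∀ (ks : List Nat), (∀ kk ∈ ks, kk < 3) → ∀ (accB : Int), 0 ≤ accB → accB < 65536 →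
    (ks.foldl (fun t kk => PySem.Int.bxor t (PySem.Int.band (pvEntry (M.map (pvSlice s)) p kk)
        ((xB.map (pvBitf s)).getD kk 0))) (pvBitf s accB)
      = pvBitf s (ks.foldl (fun t kk => if PySem.Int.band (pvEntry M p kk) 1 ≠ 0
          then PySem.Int.bxor t (xB.getD kk 0) else t) accB))
    ∧ 0 ≤ ks.foldl (fun t kk => if PySem.Int.band (pvEntry M p kk) 1 ≠ 0
          then PySem.Int.bxor t (xB.getD kk 0) else t) accB
    ∧ ks.foldl (fun t kk => if PySem.Int.band (pvEntry M p kk) 1 ≠ 0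
          then PySem.Int.bxor t (xB.getD kk 0) else t) accB < 65536 := by
  intro ks
  induction ks with
  | nil => intro _ accB h0 h1; exact ⟨rfl, h0, h1⟩
  | cons kk ks ih =>
    intro hks accB h0 h1
    have hkk3 : kk < 3 := hks kk List.mem_cons_self
    have hcf := coeff01 hWF p kk hkk3
    have hent : pvEntry (M.map (pvSlice s)) p kk = pvEntry M p kk := by
      rw [entry_map_slice hWF p kk (by omega)]
      simp [hkk3]
    have hxk := getDx_bounds hxB kk
    simp only [List.foldl_cons]
    rw [hent, getD_map_bitf]
    rcases hcf with hc0 | hc1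
    · rw [hc0]
      have hband : PySem.Int.band (0:Int) (pvBitf s (xB.getD kk 0)) = 0 := by
        rw [PySem.Int.band_comm]
        exact PySem.Int.band_zero _
      rw [hband]
      have hcond : ¬ PySem.Int.band (0:Int) 1 ≠ 0 := by decide
      rw [if_neg hcond]
      have hxz : PySem.Int.bxor (pvBitf s accB) 0 = pvBitf s accB := PySem.Int.bxor_zero _
      rw [hxz]
      exact ih (fun j hj => hks j (List.mem_cons_of_mem _ hj)) accB h0 h1
    · rw [hc1]
      have hband : PySem.Int.band (1:Int) (pvBitf s (xB.getD kk 0)) = pvBitf s (xB.getD kk 0) := by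
        rw [PySem.Int.band_comm]
        exact band01v (bitf01 s _)
      rw [hband]
      have hcond : PySem.Int.band (1:Int) 1 ≠ 0 := by decide
      rw [if_pos hcond]
      have hx := pvBitf_bxor s h0 hxk.1
      rw [← hx]
      have hbnd := pvBxor_bounds h0 h1 hxk.1 hxk.2
      exact ih (fun j hj => hks j (List.mem_cons_of_mem _ hj)) _ hbnd.1 hbnd.2

theorem back_fold (s : Nat) {M : List (List Int)} (hWF : MatWF M) (piv : List Int) :
    ∀ (js : List Nat), (∀ j ∈ js, j < 3) → ∀ (xB : List Int), (∀ v ∈ xB, 0 ≤ v ∧ v < 65536) →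
    (js.foldl (fun x j =>
        if piv.getD j 0 ≠ -1 then
          x.set j (PySem.Int.band ((List.range' (j+1) (3 - (j+1))).foldl
            (fun t kk => PySem.Int.bxor t (PySem.Int.band (pvEntry (M.map (pvSlice s)) (piv.getD j 0).toNat kk) (x.getD kk 0)))
            (pvEntry (M.map (pvSlice s)) (piv.getD j 0).toNat 3)) 1)
        else x) (xB.map (pvBitf s))
      = (js.foldl (fun x j =>
        if piv.getD j 0 ≠ -1 then
          x.set j ((List.range' (j+1) (3 - (j+1))).foldl
            (fun t kk => if PySem.Int.band (pvEntry M (piv.getD j 0).toNat kk) 1 ≠ 0 then PySem.Int.bxor t (x.getD kk 0) else t)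
            (pvEntry M (piv.getD j 0).toNat 3))
        else x) xB).map (pvBitf s))
    ∧ (∀ v ∈ js.foldl (fun x j =>
        if piv.getD j 0 ≠ -1 then
          x.set j ((List.range' (j+1) (3 - (j+1))).foldl
            (fun t kk => if PySem.Int.band (pvEntry M (piv.getD j 0).toNat kk) 1 ≠ 0 then PySem.Int.bxor t (x.getD kk 0) else t)
            (pvEntry M (piv.getD j 0).toNat 3))
        else x) xB, 0 ≤ v ∧ v < 65536)
    ∧ (js.foldl (fun x j =>
        if piv.getD j 0 ≠ -1 then
          x.set j ((List.range' (j+1) (3 - (j+1))).foldl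
            (fun t kk => if PySem.Int.band (pvEntry M (piv.getD j 0).toNat kk) 1 ≠ 0 then PySem.Int.bxor t (x.getD kk 0) else t)
            (pvEntry M (piv.getD j 0).toNat 3))
        else x) xB).length = xB.length := by
  intro js
  induction js with
  | nil => intro _ xB hxB; exact ⟨rfl, hxB, rfl⟩
  | cons j js ih =>
    intro hjs xB hxB
    have hj3 : j < 3 := hjs j List.mem_cons_self
    simp only [List.foldl_cons]
    by_cases hpv : piv.getD j 0 ≠ -1
    · rw [if_pos hpv, if_pos hpv]
      have h3b := entry3_bounds hWF (piv.getD j 0).toNat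
      have hinit : pvEntry (M.map (pvSlice s)) (piv.getD j 0).toNat 3
          = pvBitf s (pvEntry M (piv.getD j 0).toNat 3) := by
        rw [entry_map_slice hWF (piv.getD j 0).toNat 3 (by omega)]
        simp
      have hks : ∀ kk ∈ List.range' (j+1) (3 - (j+1)), kk < 3 := by
        intro kk hkk
        have := List.mem_range'_1.mp hkk
        omega
      have hss := ssum_comm s hWF (piv.getD j 0).toNat hxB (List.range' (j+1) (3 - (j+1))) hks
        (pvEntry M (piv.getD j 0).toNat 3) h3b.1 h3b.2
      rw [hinit, hss.1, band01v (bitf01 s _), ← List.map_set]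
      have hrec := ih (fun a ha => hjs a (List.mem_cons_of_mem _ ha))
        (xB.set j ((List.range' (j+1) (3 - (j+1))).foldl
          (fun t kk => if PySem.Int.band (pvEntry M (piv.getD j 0).toNat kk) 1 ≠ 0
            then PySem.Int.bxor t (xB.getD kk 0) else t)
          (pvEntry M (piv.getD j 0).toNat 3)))
        (fun v hv => by
          rcases List.mem_or_eq_of_mem_set hv with hv2 | rfl
          · exact hxB v hv2
          · exact ⟨hss.2.1, hss.2.2⟩)
      refine ⟨hrec.1, hrec.2.1, ?_⟩
      rw [hrec.2.2, List.length_set]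
    · rw [if_neg hpv, if_neg hpv]
      exact ih (fun a ha => hjs a (List.mem_cons_of_mem _ ha)) xB hxB

theorem backsub_comm (s : Nat) {M : List (List Int)} (hWF : MatWF M) (piv : List Int) :
    pvBackA (M.map (pvSlice s)) piv = (pvBackM M piv).map (pvBitf s)
    ∧ (∀ v ∈ pvBackM M piv, 0 ≤ v ∧ v < 65536) ∧ (pvBackM M piv).length = 3 := by
  have h0 : ([0,0,0] : List Int) = ([0,0,0] : List Int).map (pvBitf s) := by
    simp [pvBitf_zero]
  have h := back_fold s hWF piv [2,1,0] (by intro j hj; fin_cases hj <;> omega) [0,0,0]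
    (by intro v hv; fin_cases hv <;> norm_num)
  unfold pvBackA pvBackM
  refine ⟨?_, fun v hv => h.2.1 v hv, h.2.2⟩
  conv_lhs => rw [h0]
  exact h.1
def pvYbOf (e : List Int) : List Int := (List.range 16).map (fun k => pvBitf (15 - k) (e.getD 3 0))

theorem take3_getD {E : List (List Int)} (i : Nat) (hi : i < E.length) :
    (E.map (fun e => e.take 3)).getD i [] = (E.getD i []).take 3 := by
  rw [List.getD_eq_getElem?_getD, List.getD_eq_getElem?_getD, List.getElem?_map,
      List.getElem?_eq_getElem hi]
  rfl

theorem ybOf_getD {E : List (List Int)} (i : Nat) (hi : i < E.length) :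
    (E.map pvYbOf).getD i [] = pvYbOf (E.getD i []) := by
  rw [List.getD_eq_getElem?_getD, List.getD_eq_getElem?_getD, List.getElem?_map,
      List.getElem?_eq_getElem hi]
  rfl

theorem Ak_eq {E : List (List Int)} (k : Nat) (hk : k < 16) :
    (List.range E.length).map (fun i =>
        ((E.map (fun e => e.take 3)).getD i []) ++ [((E.map pvYbOf).getD i []).getD k 0])
      = E.map (pvSlice (15 - k)) := by
  apply List.ext_getElem (by simp)
  intro i h1 h2
  simp only [List.getElem_map, List.getElem_range]
  have hi : i < E.length := by simpa using h1
  rw [take3_getD i hi, ybOf_getD i hi]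
  unfold pvYbOf
  rw [PySem.List.getD_map_range _ _ _ _ hk]
  have : E[i] = E.getD i [] := by
    rw [List.getD_eq_getElem?_getD, List.getElem?_eq_getElem hi]
    rfl
  rw [← this]
  rfl

theorem shift16_zero {v : Int} (h0 : 0 ≤ v) (h1 : v < 65536) : v >>> (16:Nat) = 0 := by
  rw [Int.shiftRight_eq_div_pow]
  norm_num
  omega

theorem asm_shape (d0 d1 d2 : Int) (x : List Int) :
    pvAsm [d0,d1,d2] x = [PySem.Int.bor (d0 <<< (1:Nat)) (x.getD 0 0),
      PySem.Int.bor (d1 <<< (1:Nat)) (x.getD 1 0), PySem.Int.bor (d2 <<< (1:Nat)) (x.getD 2 0)] := rfl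
-- absorbing none
theorem foldl_none_absorb {α : Type} (step : Option (List Int) → α → Option (List Int))
    (hstep : ∀ a, step none a = none) : ∀ (l : List α), l.foldl step none = none := by
  intro l
  induction l with
  | nil => rfl
  | cons a l ih => simp only [List.foldl_cons, hstep]; exact ih

theorem kfold_main {E : List (List Int)} (hWF : MatWF E) :
    (List.range 16).foldl (fun acc k =>
      match acc with
      | none => none
      | some ds =>
        if pvContraA ((gElim E E.length 0 0 [-1,-1,-1]).1.map (pvSlice (15 - k))) E.length
            (gElim E E.length 0 0 [-1,-1,-1]).2.1 = true then none
        else some (pvAsm ds ((pvBackM (gElim E E.length 0 0 [-1,-1,-1]).1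
          (gElim E E.length 0 0 [-1,-1,-1]).2.2).map (pvBitf (15 - k))))) (some [0,0,0])
    = (if pvContraM (gElim E E.length 0 0 [-1,-1,-1]).1 E.length
          (gElim E E.length 0 0 [-1,-1,-1]).2.1 = true then none
       else some (pvBackM (gElim E E.length 0 0 [-1,-1,-1]).1 (gElim E E.length 0 0 [-1,-1,-1]).2.2)) := by
  have hG := gElim_comm 0 3 0 0 [-1,-1,-1] E E.length (by omega) hWF rfl
  have hWFout : MatWF (gElim E E.length 0 0 [-1,-1,-1]).1 := hG.2.1
  have hlenout : (gElim E E.length 0 0 [-1,-1,-1]).1.length = E.length := hG.2.2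
  set gOut := (gElim E E.length 0 0 [-1,-1,-1]).1 with hgOut
  set r' := (gElim E E.length 0 0 [-1,-1,-1]).2.1 with hr'
  set piv' := (gElim E E.length 0 0 [-1,-1,-1]).2.2 with hpiv'
  set step := (fun (acc : Option (List Int)) (k : Nat) =>
      match acc with
      | none => none
      | some ds =>
        if pvContraA (gOut.map (pvSlice (15 - k))) E.length r' = true then none
        else some (pvAsm ds ((pvBackM gOut piv').map (pvBitf (15 - k))))) with hstepdef
  have hback := fun s => backsub_comm s hWFout piv'
  obtain ⟨u0, u1, u2, hu⟩ := List.length_eq_three.mp (hback 0).2.2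
  have hbnd : ∀ v ∈ pvBackM gOut piv', 0 ≤ v ∧ v < 65536 := (hback 0).2.1
  rw [hu] at hbnd
  have hb0 := hbnd u0 (by simp)
  have hb1 := hbnd u1 (by simp)
  have hb2 := hbnd u2 (by simp)
  have hstep_none : ∀ a, step none a = none := by
    intro a
    rw [hstepdef]
  by_cases hcb : pvContraM gOut E.length r' = true
  · rw [if_pos hcb]
    obtain ⟨k0, hk0, hca⟩ := (contra_equiv hWFout E.length r' hlenout).mp hcb
    have hsplit : List.range 16 = List.range k0 ++ (k0 :: List.range' (k0+1) (15-k0)) := by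
      rw [List.range_eq_range', show (16:Nat) = k0 + (16 - k0) by omega,
        ← List.range'_append_1]
      congr 1
      · rw [List.range_eq_range']
      · rw [show 16 - k0 = (15 - k0) + 1 by omega, List.range'_succ]
        simp
    have habs : ∀ acc, step acc k0 = none := by
      intro acc
      rw [hstepdef]
      cases acc with
      | none => rfl
      | some ds => simp [hca]
    rw [hsplit, List.foldl_append]
    simp only [List.foldl_cons]
    rw [habs]
    exact foldl_none_absorb step hstep_none _
  · rw [if_neg hcb]
    have hcaf : ∀ k, k < 16 → pvContraA (gOut.map (pvSlice (15 - k))) E.length r' = false := by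
      intro k hk
      by_contra hne
      have hT : pvContraA (gOut.map (pvSlice (15 - k))) E.length r' = true := by
        cases h : pvContraA (gOut.map (pvSlice (15 - k))) E.length r'
        · exact absurd h hne
        · rfl
      exact hcb ((contra_equiv hWFout E.length r' hlenout).mpr ⟨k, hk, hT⟩)
    have hinv : ∀ t, t ≤ 16 → (List.range t).foldl step (some [0,0,0])
        = some [u0 >>> (16 - t), u1 >>> (16 - t), u2 >>> (16 - t)] := by
      intro t
      induction t with
      | zero =>
        intro _
        simp only [List.range_zero, List.foldl_nil]
        rw [shift16_zero hb0.1 hb0.2, shift16_zero hb1.1 hb1.2, shift16_zero hb2.1 hb2.2]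
      | succ t ih =>
        intro ht
        rw [List.range_succ, List.foldl_append, ih (by omega)]
        simp only [List.foldl_cons, List.foldl_nil]
        rw [hstepdef]
        simp only [hcaf t (by omega), Bool.false_eq_true, if_false]
        congr 1
        rw [hu, asm_shape]
        have hmap : ([u0,u1,u2].map (pvBitf (15 - t))) =
            [pvBitf (15-t) u0, pvBitf (15-t) u1, pvBitf (15-t) u2] := rfl
        rw [hmap]
        have e1 : (16 - t) = (15 - t) + 1 := by omega
        have e2 : (16 - (t+1)) = 15 - t := by omega
        rw [e1, e2]
        simp only [List.getD_cons_zero, List.getD_cons_succ]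
        rw [pvAsmStep hb0.1, pvAsmStep hb1.1, pvAsmStep hb2.1]
    have hfin := hinv 16 (by omega)
    rw [hfin, hu]
    simp
theorem band1_01 (v : Int) : PySem.Int.band v 1 = 0 ∨ PySem.Int.band v 1 = 1 := by
  rw [PySem.Int.band_one]
  have h1 := PySem.Int.mod_nonneg v (by omega : (0:Int) < 2)
  have h2 := PySem.Int.mod_lt v (by omega : (0:Int) < 2)
  omega

theorem erow_wf (mv y : Int) :
    RowWF [PySem.Int.band mv 1, PySem.Int.band (mv >>> (1:Nat)) 1, PySem.Int.band (mv >>> (2:Nat)) 1,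
      PySem.Int.mod y 65536] := by
  refine rowWF_of_parts (band1_01 _) (band1_01 _) (band1_01 _) ?_ ?_
  · exact PySem.Int.mod_nonneg y (by omega)
  · exact PySem.Int.mod_lt y (by omega)

theorem erow_yb (mv y : Int) :
    pvYbOf [PySem.Int.band mv 1, PySem.Int.band (mv >>> (1:Nat)) 1, PySem.Int.band (mv >>> (2:Nat)) 1,
      PySem.Int.mod y 65536]
    = (List.range 16).map (fun (k : Nat) => PySem.Int.band (y >>> (15 - k)) 1) := by
  unfold pvYbOf
  apply List.map_congr_left
  intro k hk
  have hk16 : k < 16 := List.mem_range.mp hk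
  have : ([PySem.Int.band mv 1, PySem.Int.band (mv >>> (1:Nat)) 1, PySem.Int.band (mv >>> (2:Nat)) 1,
      PySem.Int.mod y 65536].getD 3 0) = PySem.Int.mod y 65536 := rfl
  rw [this, pvBitf_mod65536 (15 - k) (by omega) y]
  rfl

theorem inner_comm (ref : List (String × Int)) :
    ∀ (rest : List (List (String × Int))) (X Y E : List (List Int)),
    X = E.map (fun e => e.take 3) → Y = E.map pvYbOf → MatWF E →
    ((rest.foldl (fun st2 g =>
      let mv := PySem.Int.bxor (pvGet g "addr") (pvGet ref "addr")
      if mv = 0 then st2 else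
      (st2.1 ++ [[PySem.Int.band mv 1, PySem.Int.band (mv >>> (1:Nat)) 1, PySem.Int.band (mv >>> (2:Nat)) 1]],
       st2.2 ++ [(List.range 16).map (fun (k : Nat) =>
         PySem.Int.band ((PySem.Int.bxor (pvGet g "cw16") (pvGet ref "cw16")) >>> (15 - k)) 1)])) (X, Y)).1
      = (rest.foldl (fun e2 g =>
      let mv := PySem.Int.bxor (pvGet g "addr") (pvGet ref "addr")
      if mv = 0 then e2 else
      e2 ++ [[PySem.Int.band mv 1, PySem.Int.band (mv >>> (1:Nat)) 1, PySem.Int.band (mv >>> (2:Nat)) 1,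
              PySem.Int.mod (PySem.Int.bxor (pvGet g "cw16") (pvGet ref "cw16")) 65536]]) E).map (fun e => e.take 3))
    ∧ ((rest.foldl (fun st2 g =>
      let mv := PySem.Int.bxor (pvGet g "addr") (pvGet ref "addr")
      if mv = 0 then st2 else
      (st2.1 ++ [[PySem.Int.band mv 1, PySem.Int.band (mv >>> (1:Nat)) 1, PySem.Int.band (mv >>> (2:Nat)) 1]],
       st2.2 ++ [(List.range 16).map (fun (k : Nat) =>
         PySem.Int.band ((PySem.Int.bxor (pvGet g "cw16") (pvGet ref "cw16")) >>> (15 - k)) 1)])) (X, Y)).2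
      = (rest.foldl (fun e2 g =>
      let mv := PySem.Int.bxor (pvGet g "addr") (pvGet ref "addr")
      if mv = 0 then e2 else
      e2 ++ [[PySem.Int.band mv 1, PySem.Int.band (mv >>> (1:Nat)) 1, PySem.Int.band (mv >>> (2:Nat)) 1,
              PySem.Int.mod (PySem.Int.bxor (pvGet g "cw16") (pvGet ref "cw16")) 65536]]) E).map pvYbOf)
    ∧ MatWF (rest.foldl (fun e2 g =>
      let mv := PySem.Int.bxor (pvGet g "addr") (pvGet ref "addr")
      if mv = 0 then e2 else
      e2 ++ [[PySem.Int.band mv 1, PySem.Int.band (mv >>> (1:Nat)) 1, PySem.Int.band (mv >>> (2:Nat)) 1,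
              PySem.Int.mod (PySem.Int.bxor (pvGet g "cw16") (pvGet ref "cw16")) 65536]]) E) := by
  intro rest
  induction rest with
  | nil =>
    intro X Y E hX hY hWF
    exact ⟨hX, hY, hWF⟩
  | cons g rest ih =>
    intro X Y E hX hY hWF
    simp only [List.foldl_cons]
    by_cases hmv : PySem.Int.bxor (pvGet g "addr") (pvGet ref "addr") = 0
    · simp only [hmv, if_pos rfl, reduceIte]
      exact ih X Y E hX hY hWF
    · simp only [hmv, if_neg hmv, reduceIte]
      apply ih
      · rw [hX, List.map_append]
        rfl
      · rw [hY, List.map_append]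
        congr 1
        rw [List.map_singleton, erow_yb]
      · intro e he
        rcases List.mem_append.mp he with he2 | he3
        · exact hWF e he2
        · rw [List.mem_singleton.mp he3]
          exact erow_wf _ _
theorem step_comm (lst : List (List (String × Int))) (X Y E : List (List Int))
    (hX : X = E.map (fun e => e.take 3)) (hY : Y = E.map pvYbOf) (hWF : MatWF E) :
    ((pvStepA (X, Y) lst).1 = (pvStepM E lst).map (fun e => e.take 3))
    ∧ ((pvStepA (X, Y) lst).2 = (pvStepM E lst).map pvYbOf)
    ∧ MatWF (pvStepM E lst) := by
  unfold pvStepA pvStepM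
  by_cases h2 : lst.length < 2
  · rw [if_pos h2, if_pos h2]
    exact ⟨hX, hY, hWF⟩
  · rw [if_neg h2, if_neg h2]
    cases lst with
    | nil => exact ⟨hX, hY, hWF⟩
    | cons ref rest => exact inner_comm ref rest X Y E hX hY hWF

theorem items_comm :
    ∀ (L : List (Int × List (List (String × Int)))) (X Y E : List (List Int)),
    X = E.map (fun e => e.take 3) → Y = E.map pvYbOf → MatWF E →
    ((L.foldl (fun st p => pvStepA st p.2) (X, Y)).1
      = (L.foldl (fun e2 p => pvStepM e2 p.2) E).map (fun e => e.take 3))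
    ∧ ((L.foldl (fun st p => pvStepA st p.2) (X, Y)).2
      = (L.foldl (fun e2 p => pvStepM e2 p.2) E).map pvYbOf)
    ∧ MatWF (L.foldl (fun e2 p => pvStepM e2 p.2) E) := by
  intro L
  induction L with
  | nil => intro X Y E hX hY hWF; exact ⟨hX, hY, hWF⟩
  | cons p L ih =>
    intro X Y E hX hY hWF
    simp only [List.foldl_cons]
    have h := step_comm p.2 X Y E hX hY hWF
    have hpair : pvStepA (X, Y) p.2 = ((pvStepM E p.2).map (fun e => e.take 3), (pvStepM E p.2).map pvYbOf) := by
      rw [Prod.ext_iff]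
      exact ⟨h.1, h.2.1⟩
    rw [hpair]
    exact ih _ _ _ rfl rfl h.2.2

theorem pvSolveAM (g : List (List (String × Int))) : pvSolveA g = pvSolveM g := by
  unfold pvSolveA pvSolveM
  have hc := items_comm ((pvGroupBySpeed g).items) [] [] [] rfl rfl (by intro e he; cases he)
  have hXY : ((pvGroupBySpeed g).items.foldl (fun st p => pvStepA st p.2)
      (([] : List (List Int)), ([] : List (List Int))))
      = ((((pvGroupBySpeed g).items.foldl (fun e2 p => pvStepM e2 p.2) []).map (fun e => e.take 3)),
         (((pvGroupBySpeed g).items.foldl (fun e2 p => pvStepM e2 p.2) []).map pvYbOf)) := by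
    rw [Prod.ext_iff]
    exact ⟨hc.1, hc.2.1⟩
  rw [show (pvGroupBySpeed g).values = (pvGroupBySpeed g).items.map (·.2) from rfl, List.foldl_map]
  rw [hXY]
  set E := ((pvGroupBySpeed g).items.foldl (fun e2 p => pvStepM e2 p.2) []) with hE
  have hWF : MatWF E := hc.2.2
  simp only [List.length_map]
  by_cases hlen : E.length < 3
  · rw [if_pos hlen, if_pos hlen]
  · rw [if_neg hlen, if_neg hlen]
    have hcong : (List.range 16).foldl (fun acc k =>
        match acc with
        | none => none
        | some ds =>
          if pvContraA ((gElim ((List.range E.length).map (fun i =>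
                ((E.map (fun e => e.take 3)).getD i []) ++ [((E.map pvYbOf).getD i []).getD k 0]))
                E.length 0 0 [-1,-1,-1]).1) E.length
              ((gElim ((List.range E.length).map (fun i =>
                ((E.map (fun e => e.take 3)).getD i []) ++ [((E.map pvYbOf).getD i []).getD k 0]))
                E.length 0 0 [-1,-1,-1]).2.1) = true then none
          else some (pvAsm ds (pvBackA
            ((gElim ((List.range E.length).map (fun i =>
                ((E.map (fun e => e.take 3)).getD i []) ++ [((E.map pvYbOf).getD i []).getD k 0]))
                E.length 0 0 [-1,-1,-1]).1)
            ((gElim ((List.range E.length).map (fun i =>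
                ((E.map (fun e => e.take 3)).getD i []) ++ [((E.map pvYbOf).getD i []).getD k 0]))
                E.length 0 0 [-1,-1,-1]).2.2)))) (some [0,0,0])
        = (List.range 16).foldl (fun acc k =>
        match acc with
        | none => none
        | some ds =>
          if pvContraA ((gElim E E.length 0 0 [-1,-1,-1]).1.map (pvSlice (15 - k))) E.length
              (gElim E E.length 0 0 [-1,-1,-1]).2.1 = true then none
          else some (pvAsm ds ((pvBackM (gElim E E.length 0 0 [-1,-1,-1]).1
            (gElim E E.length 0 0 [-1,-1,-1]).2.2).map (pvBitf (15 - k))))) (some [0,0,0]) := by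
      apply PySem.List.foldl_congr_mem
      intro acc k hk
      have hk16 : k < 16 := List.mem_range.mp hk
      cases acc with
      | none => rfl
      | some ds =>
        rw [Ak_eq k hk16]
        have hG := gElim_comm (15 - k) 3 0 0 [-1,-1,-1] E E.length (by omega) hWF rfl
        rw [hG.1]
        have hbs := backsub_comm (15 - k) hG.2.1 ((gElim E E.length 0 0 [-1,-1,-1]).2.2)
        rw [hbs.1]
    rw [hcong]
    exact kfold_main hWF


theorem pvGroup_filter (g : List (List (String × Int))) (s : Int) :
    (pvGroupBySpeed g).getD s [] = g.filter (fun r => pvGet r "speed" == s) := by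
  unfold pvGroupBySpeed
  have h : g.foldl (fun d r => d.modify (pvGet r "speed") [] (· ++ [r])) PySem.Dict.empty
      = (g.map (fun r => (pvGet r "speed", r))).foldl (fun d p => d.modify p.1 [] (· ++ [p.2])) PySem.Dict.empty := by
    rw [List.foldl_map]
  rw [h, PySem.Dict.getD_foldl_modify_append]
  simp [List.filter_map, Function.comp_def]


-- ===== layer 2: the batched matrix elimination (pvSolveM) vs B's pair Gauss-Jordan (pvSolveB) =====
-- a matrix row [a0,a1,a2,y] corresponds to the pair (a0 + 2*a1 + 4*a2, y)
def enc (e : List Int) : Int × Int := (e.getD 0 0 + 2 * e.getD 1 0 + 4 * e.getD 2 0, e.getD 3 0)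

theorem enc_bits {a b c : Int} (ha : a = 0 ∨ a = 1) (hb : b = 0 ∨ b = 1) (hc : c = 0 ∨ c = 1) :
    pvBitf 0 (a + 2*b + 4*c) = a ∧ pvBitf 1 (a + 2*b + 4*c) = b ∧ pvBitf 2 (a + 2*b + 4*c) = c ∧
    0 ≤ a + 2*b + 4*c ∧ a + 2*b + 4*c < 8 := by
  rcases ha with rfl|rfl <;> rcases hb with rfl|rfl <;> rcases hc with rfl|rfl <;>
    exact ⟨by decide, by decide, by decide, by decide, by decide⟩

theorem row_enc {e : List Int} (h : RowWF e) :
    (∀ j, j < 3 → pvBitf j (enc e).1 = e.getD j 0) ∧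
    0 ≤ (enc e).1 ∧ (enc e).1 < 8 ∧ (enc e).2 = e.getD 3 0 ∧ 0 ≤ (enc e).2 ∧ (enc e).2 < 65536 := by
  obtain ⟨a,b,c,d,rfl⟩ := rowWF_shape h
  obtain ⟨-, h0, h1, h2, h3, h4⟩ := h
  simp only [List.getD_cons_zero, List.getD_cons_succ] at h0 h1 h2 h3 h4
  have hb := enc_bits h0 h1 h2
  refine ⟨?_, ?_, ?_, by simp [enc], by simpa [enc] using h3, by simpa [enc] using h4⟩
  · intro j hj
    interval_cases j
    · simpa [enc] using hb.1
    · simpa [enc] using hb.2.1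
    · simpa [enc] using hb.2.2.1
  · simpa [enc] using hb.2.2.2.1
  · simpa [enc] using hb.2.2.2.2

theorem rowWF_coeff {e : List Int} (h : RowWF e) {c : Nat} (hc : c < 3) :
    e.getD c 0 = 0 ∨ e.getD c 0 = 1 := by
  obtain ⟨-, h0, h1, h2, -, -⟩ := h
  interval_cases c
  exacts [h0, h1, h2]

theorem mod8_bits (mv : Int) : PySem.Int.mod mv 8
    = PySem.Int.band mv 1 + 2 * PySem.Int.band (mv >>> (1:Nat)) 1 + 4 * PySem.Int.band (mv >>> (2:Nat)) 1 := by
  have h0 := pvBitf_arith 0 mv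
  have h1 := pvBitf_arith 1 mv
  have h2 := pvBitf_arith 2 mv
  unfold pvBitf at h0 h1 h2
  rw [Int.shiftRight_zero] at h0
  rw [PySem.Int.mod_eq_emod_of_pos (by omega : (0:Int) < 8), h0, h1, h2]
  norm_num
  omega

theorem enc_xorFrom {e p : List Int} (he : RowWF e) (hp : RowWF p) {c : Nat} (hc : c < 3)
    (hl : ∀ j, j < c → pvBitf j (enc p).1 = 0) :
    enc (pvXorFrom c e p) = (PySem.Int.bxor (enc e).1 (enc p).1, PySem.Int.bxor (enc e).2 (enc p).2)
    ∧ RowWF (pvXorFrom c e p) := by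
  obtain ⟨a0,a1,a2,a3,rfl⟩ := rowWF_shape he
  obtain ⟨b0,b1,b2,b3,rfl⟩ := rowWF_shape hp
  obtain ⟨-, ha0, ha1, ha2, ha3, ha3'⟩ := he
  obtain ⟨-, hb0, hb1, hb2, hb3, hb3'⟩ := hp
  simp only [List.getD_cons_zero, List.getD_cons_succ] at ha0 ha1 ha2 ha3 ha3' hb0 hb1 hb2 hb3 hb3'
  have hbnd := pvBxor_bounds ha3 ha3' hb3 hb3'
  have henc1 : (enc [b0,b1,b2,b3]).1 = b0 + 2*b1 + 4*b2 := by simp [enc]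
  have heb := enc_bits hb0 hb1 hb2
  interval_cases c
  · rw [xorFrom0]
    refine ⟨?_, rowWF_of_parts (bxor01 ha0 hb0) (bxor01 ha1 hb1) (bxor01 ha2 hb2) hbnd.1 hbnd.2⟩
    simp only [enc, List.getD_cons_zero, List.getD_cons_succ, Prod.mk.injEq]
    refine ⟨?_, by trivial⟩
    rcases ha0 with rfl|rfl <;> rcases ha1 with rfl|rfl <;> rcases ha2 with rfl|rfl <;>
      rcases hb0 with rfl|rfl <;> rcases hb1 with rfl|rfl <;> rcases hb2 with rfl|rfl <;> decide
  · have hb0' : b0 = 0 := by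
      have h := hl 0 (by omega)
      rw [henc1, heb.1] at h
      exact h
    subst hb0'
    rw [xorFrom1]
    refine ⟨?_, rowWF_of_parts ha0 (bxor01 ha1 hb1) (bxor01 ha2 hb2) hbnd.1 hbnd.2⟩
    simp only [enc, List.getD_cons_zero, List.getD_cons_succ, Prod.mk.injEq]
    refine ⟨?_, by trivial⟩
    rcases ha0 with rfl|rfl <;> rcases ha1 with rfl|rfl <;> rcases ha2 with rfl|rfl <;>
      rcases hb1 with rfl|rfl <;> rcases hb2 with rfl|rfl <;> decide
  · have hb0' : b0 = 0 := by
      have h := hl 0 (by omega)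
      rw [henc1, heb.1] at h
      exact h
    subst hb0'
    have hb1' : b1 = 0 := by
      have h := hl 1 (by omega)
      rw [henc1, heb.2.1] at h
      simpa using h
    subst hb1'
    rw [xorFrom2]
    refine ⟨?_, rowWF_of_parts ha0 ha1 (bxor01 ha2 hb2) hbnd.1 hbnd.2⟩
    simp only [enc, List.getD_cons_zero, List.getD_cons_succ, Prod.mk.injEq]
    refine ⟨?_, by trivial⟩
    rcases ha0 with rfl|rfl <;> rcases ha1 with rfl|rfl <;> rcases ha2 with rfl|rfl <;>
      rcases hb2 with rfl|rfl <;> decide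

-- getD bookkeeping helpers
theorem getD_map_lt {α β : Type} (f : α → β) (l : List α) {t : Nat} (h : t < l.length) (d : β) (d' : α) :
    (l.map f).getD t d = f (l.getD t d') := by
  rw [List.getD_eq_getElem _ _ (by simpa using h), List.getD_eq_getElem _ _ h, List.getElem_map]

theorem getD_drop1 {α : Type} (l : List α) {t : Nat} (d : α) :
    (l.drop 1).getD t d = l.getD (1+t) d := by
  rw [List.getD_eq_getElem?_getD, List.getD_eq_getElem?_getD, List.getElem?_drop]

theorem getD_set_ne' {α : Type} (l : List α) {i j : Nat} (h : i ≠ j) (v : α) (d : α) :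
    (l.set i v).getD j d = l.getD j d := by
  rw [List.getD_eq_getElem?_getD, List.getD_eq_getElem?_getD, List.getElem?_set_ne h]

theorem getD_set_self' {α : Type} (l : List α) {i : Nat} (h : i < l.length) (v : α) (d : α) :
    (l.set i v).getD i d = v := by
  rw [List.getD_eq_getElem?_getD, List.getElem?_set_self h]
  rfl

theorem getD_append_lt {α : Type} (l1 l2 : List α) {k : Nat} (h : k < l1.length) (d : α) :
    (l1 ++ l2).getD k d = l1.getD k d := by
  rw [List.getD_eq_getElem?_getD, List.getD_eq_getElem?_getD, List.getElem?_append_left h]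

theorem getD_concat_len {α : Type} (l : List α) (b d : α) :
    (l ++ [b]).getD l.length d = b := by
  rw [List.getD_eq_getElem?_getD, List.getElem?_concat_length]
  rfl

theorem pvEntry_eq (M : List (List Int)) (i j : Nat) : pvEntry M i j = (pvRow M i).getD j 0 := rfl

theorem pvRow_set_ne {M : List (List Int)} {i k : Nat} (h : i ≠ k) (v : List Int) :
    pvRow (M.set i v) k = pvRow M k := by
  unfold pvRow
  rw [List.getD_eq_getElem?_getD, List.getD_eq_getElem?_getD, List.getElem?_set_ne h]

theorem pvRow_set_self {M : List (List Int)} {i : Nat} (h : i < M.length) (v : List Int) :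
    pvRow (M.set i v) i = v := by
  unfold pvRow
  rw [List.getD_eq_getElem?_getD, List.getElem?_set_self h]
  rfl

theorem pvSwap_len (M : List (List Int)) (r pr : Nat) : (pvSwap M r pr).length = M.length := by
  simp [pvSwap]

theorem pvRow_swap {M : List (List Int)} {r pr : Nat} (hr : r < M.length) (hpr : pr < M.length) :
    ∀ k, pvRow (pvSwap M r pr) k
      = if k = r then pvRow M pr else if k = pr then pvRow M r else pvRow M k := by
  intro k
  unfold pvSwap
  by_cases hkpr : k = pr
  · subst hkpr
    rw [pvRow_set_self (by simpa using hpr) _]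
    by_cases hkr : k = r
    · rw [if_pos hkr, hkr]
    · rw [if_neg hkr, if_pos rfl]
  · rw [pvRow_set_ne (fun h => hkpr h.symm) _]
    by_cases hkr : k = r
    · subst hkr
      rw [pvRow_set_self hr _, if_pos rfl]
    · rw [pvRow_set_ne (fun h => hkr h.symm) _, if_neg hkr, if_neg hkpr]

theorem elim_fold_rows (r c : Nat) :
    ∀ (I : List Nat) (M : List (List Int)), I.Nodup → (∀ i ∈ I, i < M.length) →
    ((I.foldl (fun Mx i =>
        if i ≠ r ∧ PySem.Int.band (pvEntry Mx i c) 1 ≠ 0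
        then Mx.set i (pvXorFrom c (pvRow Mx i) (pvRow Mx r)) else Mx) M).length = M.length)
    ∧ (∀ k, pvRow (I.foldl (fun Mx i =>
        if i ≠ r ∧ PySem.Int.band (pvEntry Mx i c) 1 ≠ 0
        then Mx.set i (pvXorFrom c (pvRow Mx i) (pvRow Mx r)) else Mx) M) k
      = if k ∈ I ∧ k ≠ r ∧ PySem.Int.band (pvEntry M k c) 1 ≠ 0
        then pvXorFrom c (pvRow M k) (pvRow M r) else pvRow M k) := by
  intro I
  induction I with
  | nil =>
    intro M _ _
    refine ⟨rfl, fun k => ?_⟩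
    rw [if_neg (by simp)]
    rfl
  | cons i I ih =>
    intro M hnd hI
    have hi : i < M.length := hI i List.mem_cons_self
    obtain ⟨hiI, hnd'⟩ := List.nodup_cons.mp hnd
    simp only [List.foldl_cons]
    by_cases hc1 : i ≠ r ∧ PySem.Int.band (pvEntry M i c) 1 ≠ 0
    · rw [if_pos hc1]
      have hM1len : (M.set i (pvXorFrom c (pvRow M i) (pvRow M r))).length = M.length := by simp
      have hrowNe : ∀ k, k ≠ i → pvRow (M.set i (pvXorFrom c (pvRow M i) (pvRow M r))) k = pvRow M k :=
        fun k hk => pvRow_set_ne (fun h => hk h.symm) _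
      have hrowI : pvRow (M.set i (pvXorFrom c (pvRow M i) (pvRow M r))) i
          = pvXorFrom c (pvRow M i) (pvRow M r) := pvRow_set_self hi _
      have hrowR : pvRow (M.set i (pvXorFrom c (pvRow M i) (pvRow M r))) r = pvRow M r :=
        hrowNe r (fun h => hc1.1 h.symm)
      have hIH := ih (M.set i (pvXorFrom c (pvRow M i) (pvRow M r))) hnd'
        (fun j hj => by rw [hM1len]; exact hI j (List.mem_cons_of_mem _ hj))
      refine ⟨by rw [hIH.1, hM1len], fun k => ?_⟩
      rw [hIH.2 k]
      by_cases hkI : k ∈ I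
      · have hki : k ≠ i := fun he => hiI (he ▸ hkI)
        have hent : pvEntry (M.set i (pvXorFrom c (pvRow M i) (pvRow M r))) k c = pvEntry M k c := by
          rw [pvEntry_eq, hrowNe k hki, ← pvEntry_eq]
        rw [hrowNe k hki, hrowR, hent]
        by_cases h2 : k ≠ r ∧ PySem.Int.band (pvEntry M k c) 1 ≠ 0
        · rw [if_pos ⟨hkI, h2⟩, if_pos ⟨List.mem_cons_of_mem _ hkI, h2⟩]
        · rw [if_neg (fun h => h2 h.2), if_neg (fun h => h2 h.2)]
      · by_cases hki : k = i
        · subst hki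
          rw [if_neg (fun h => hkI h.1), hrowI, if_pos ⟨List.mem_cons_self, hc1⟩]
        · rw [if_neg (fun h => hkI h.1), hrowNe k hki,
             if_neg (fun h => by rcases List.mem_cons.mp h.1 with h'|h'; exact hki h'; exact hkI h')]
    · rw [if_neg hc1]
      have hIH := ih M hnd' (fun j hj => hI j (List.mem_cons_of_mem _ hj))
      refine ⟨hIH.1, fun k => ?_⟩
      rw [hIH.2 k]
      by_cases hki : k = i
      · subst hki
        rw [if_neg (fun h => hiI h.1), if_neg (fun h => hc1 h.2)]
      · by_cases hkI : k ∈ I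
        · by_cases h2 : k ≠ r ∧ PySem.Int.band (pvEntry M k c) 1 ≠ 0
          · rw [if_pos ⟨hkI, h2⟩, if_pos ⟨List.mem_cons_of_mem _ hkI, h2⟩]
          · rw [if_neg (fun h => h2 h.2), if_neg (fun h => h2 h.2)]
        · rw [if_neg (fun h => hkI h.1),
             if_neg (fun h => by rcases List.mem_cons.mp h.1 with h'|h'; exact hki h'; exact hkI h')]

theorem elimCol_rows {M : List (List Int)} {m r c : Nat} (hm : M.length = m) :
    (pvElimCol M m r c).length = m ∧
    ∀ k, pvRow (pvElimCol M m r c) k =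
      if k < m ∧ k ≠ r ∧ PySem.Int.band (pvEntry M k c) 1 ≠ 0
      then pvXorFrom c (pvRow M k) (pvRow M r) else pvRow M k := by
  unfold pvElimCol
  have h := elim_fold_rows r c (List.range m) M List.nodup_range
    (fun i hi => by rw [hm]; exact List.mem_range.mp hi)
  refine ⟨by rw [h.1, hm], fun k => ?_⟩
  rw [h.2 k]
  by_cases hk : k < m
  · by_cases h2 : k ≠ r ∧ PySem.Int.band (pvEntry M k c) 1 ≠ 0
    · rw [if_pos ⟨List.mem_range.mpr hk, h2⟩, if_pos ⟨hk, h2⟩]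
    · rw [if_neg (fun h3 => h2 h3.2), if_neg (fun h3 => h2 h3.2)]
  · rw [if_neg (fun h3 => hk (List.mem_range.mp h3.1)), if_neg (fun h3 => hk h3.1)]

theorem elimCol_wf {M : List (List Int)} {m r c : Nat} (hWF : MatWF M) (hm : M.length = m)
    (hr : r < m) (hc : c < 3) : MatWF (pvElimCol M m r c) := by
  unfold pvElimCol
  exact (elim_fold 0 r c hc (List.range m) M hWF (by omega)
    (fun i hi => by rw [hm]; exact List.mem_range.mp hi)).2.1

-- the bRedc condition matches the matrix-side condition, and bRedc mirrors the row op
theorem redc_comm {e P : List Int} (he : RowWF e) (hP : RowWF P) {c : Nat} (hc : c < 3)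
    (hplow : ∀ j, j < c → pvBitf j (enc P).1 = 0) :
    enc (if PySem.Int.band (e.getD c 0) 1 ≠ 0 then pvXorFrom c e P else e)
      = bRedc c (enc P) (enc e)
    ∧ RowWF (if PySem.Int.band (e.getD c 0) 1 ≠ 0 then pvXorFrom c e P else e) := by
  have hre := row_enc he
  have h01 := rowWF_coeff he hc
  have hcnd : (PySem.Int.band ((enc e).1 >>> c) 1 ≠ 0) ↔ (PySem.Int.band (e.getD c 0) 1 ≠ 0) := by
    show (pvBitf c (enc e).1 ≠ 0) ↔ (PySem.Int.band (e.getD c 0) 1 ≠ 0)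
    rw [hre.1 c hc, band01v h01]
  unfold bRedc
  by_cases hx : PySem.Int.band (e.getD c 0) 1 ≠ 0
  · rw [if_pos hx, if_pos (hcnd.mpr hx)]
    have hxf := enc_xorFrom he hP hc hplow
    exact ⟨hxf.1, hxf.2⟩
  · rw [if_neg hx, if_neg (fun h => hx (hcnd.mp h))]
    exact ⟨rfl, he⟩

theorem bRedc_bit {q p : Int × Int} (hq : 0 ≤ q.1) (hp : 0 ≤ p.1) (c : Nat) (j : Nat) :
    pvBitf j (bRedc c p q).1
      = if PySem.Int.band (q.1 >>> c) 1 ≠ 0 then PySem.Int.bxor (pvBitf j q.1) (pvBitf j p.1)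
        else pvBitf j q.1 := by
  unfold bRedc
  by_cases h : PySem.Int.band (q.1 >>> c) 1 ≠ 0
  · rw [if_pos h, if_pos h]
    exact pvBitf_bxor j hq hp
  · rw [if_neg h, if_neg h]

theorem bRedc_bitc {q p : Int × Int} (hq : 0 ≤ q.1) (hp : 0 ≤ p.1) {c : Nat}
    (hpc : pvBitf c p.1 = 1) : pvBitf c (bRedc c p q).1 = 0 := by
  rw [bRedc_bit hq hp]
  by_cases h : PySem.Int.band (q.1 >>> c) 1 ≠ 0
  · rw [if_pos h]
    have hq1 : pvBitf c q.1 = 1 := by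
      rcases bitf01 c q.1 with h0|h1
      · exact absurd h0 h
      · exact h1
    rw [hq1, hpc]
    decide
  · rw [if_neg h]
    push_neg at h
    exact h

theorem bRedc_bitl {q p : Int × Int} (hq : 0 ≤ q.1) (hp : 0 ≤ p.1) {c j : Nat}
    (hpj : pvBitf j p.1 = 0) : pvBitf j (bRedc c p q).1 = pvBitf j q.1 := by
  rw [bRedc_bit hq hp]
  by_cases h : PySem.Int.band (q.1 >>> c) 1 ≠ 0
  · rw [if_pos h, hpj, PySem.Int.bxor_zero]
  · rw [if_neg h]

-- the simulation invariant between A's matrix state and B's (pivots, rest) state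
structure SimInv (M : List (List Int)) (r c : Nat) (piv : List Int)
    (pivs : List (Nat × Int × Int)) (rest : List (Int × Int)) : Prop where
  wf : MatWF M
  len : M.length = r + rest.length
  plen : pivs.length = r
  pivlen : piv.length = 3
  hc3 : c ≤ 3
  restEq : ∀ t, t < rest.length → rest.getD t (0,0) = enc (pvRow M (r + t))
  pivEq : ∀ k, k < r → (pivs.getD k (0,0,0)).2 = enc (pvRow M k)
  colLt : ∀ k, k < r → (pivs.getD k (0,0,0)).1 < c
  pivIdx : ∀ k, k < r → piv.getD (pivs.getD k (0,0,0)).1 0 = (k : Int)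
  pivNone : ∀ j, j < 3 → (∀ k, k < r → (pivs.getD k (0,0,0)).1 ≠ j) → piv.getD j 0 = -1
  restLow : ∀ t, t < rest.length → ∀ j, j < c → pvBitf j (rest.getD t (0,0)).1 = 0
  ownBit : ∀ k, k < r → pvBitf (pivs.getD k (0,0,0)).1 (pivs.getD k (0,0,0)).2.1 = 1
  othBit : ∀ k k', k < r → k' < r → k ≠ k' →
    pvBitf (pivs.getD k' (0,0,0)).1 (pivs.getD k (0,0,0)).2.1 = 0

theorem bStep_nil (pivs : List (Nat × Int × Int)) (c : Nat) : bStep (pivs, []) c = (pivs, []) := by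
  unfold bStep
  simp

theorem foldl_bStep_nil (l : List Nat) (pivs : List (Nat × Int × Int)) :
    l.foldl bStep (pivs, []) = (pivs, []) := by
  induction l generalizing pivs with
  | nil => rfl
  | cons a l ih =>
    rw [List.foldl_cons, bStep_nil]
    exact ih pivs

theorem findPiv_pair {c : Nat} (hc : c < 3) :
    ∀ (rest : List (Int × Int)) (r : Nat) (M : List (List Int)), MatWF M →
    M.length = r + rest.length →
    (∀ t, t < rest.length → rest.getD t (0,0) = enc (pvRow M (r + t))) →
    pvFindPiv M r M.length c
      = (rest.findIdx? (fun q : Int × Int => PySem.Int.band (q.1 >>> c) 1 != 0)).map (fun i => r + i) := by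
  intro rest
  induction rest with
  | nil =>
    intro r M hWF hlen hrest
    unfold pvFindPiv
    rw [show M.length - r = 0 by simp at hlen; omega]
    simp
  | cons q qs ih =>
    intro r M hWF hlen hrest
    have hlen' : M.length = r + (qs.length + 1) := by simpa using hlen
    have hrM : r < M.length := by omega
    have hq : q = enc (pvRow M r) := by
      have h := hrest 0 (by simp)
      simpa using h
    have hre := row_enc (rowWF_row hWF r hrM)
    have hcv : pvBitf c q.1 = pvEntry M r c := by
      rw [hq, hre.1 c hc, pvEntry_eq]
    have hbandA : (PySem.Int.band (pvEntry M r c) 1 != 0)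
        = (PySem.Int.band (q.1 >>> c) 1 != 0) := by
      show (PySem.Int.band (pvEntry M r c) 1 != 0) = (pvBitf c q.1 != 0)
      rw [band01v (coeff01 hWF r c hc), hcv]
    unfold pvFindPiv
    rw [show M.length - r = qs.length + 1 by omega, List.range'_succ, List.find?_cons,
        List.findIdx?_cons, hbandA]
    by_cases hcnd : (PySem.Int.band (q.1 >>> c) 1 != 0) = true
    · rw [hcnd]
      simp
    · have hf : (PySem.Int.band (q.1 >>> c) 1 != 0) = false := by
        cases h : (PySem.Int.band (q.1 >>> c) 1 != 0)
        · rfl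
        · exact absurd h hcnd
      rw [hf]
      have hih := ih (r+1) M hWF (by omega) (fun t ht => by
        have h := hrest (t+1) (by simp; omega)
        rw [List.getD_cons_succ] at h
        have he : r + (t+1) = r+1+t := by omega
        rw [he] at h
        exact h)
      have hL : (List.range' (r+1) qs.length).find?
            (fun i => PySem.Int.band (pvEntry M i c) 1 != 0)
          = pvFindPiv M (r+1) M.length c := by
        unfold pvFindPiv
        rw [show M.length - (r+1) = qs.length by omega]
      simp only [Bool.false_eq_true, if_false]
      rw [hL, hih]
      cases qs.findIdx? (fun q : Int × Int => PySem.Int.band (q.1 >>> c) 1 != 0) <;> simp <;> omega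

theorem sim : ∀ (fuel c : Nat), c + fuel = 3 →
    ∀ (M : List (List Int)) (m r : Nat) (piv : List Int) (pivs : List (Nat × Int × Int))
      (rest : List (Int × Int)), M.length = m → SimInv M r c piv pivs rest →
    SimInv (gElim M m r c piv).1 (gElim M m r c piv).2.1 3 (gElim M m r c piv).2.2
      ((List.range' c fuel).foldl bStep (pivs, rest)).1
      ((List.range' c fuel).foldl bStep (pivs, rest)).2
    ∧ (gElim M m r c piv).1.length = m := by
  intro fuel
  induction fuel with
  | zero =>
    intro c hc M m r piv pivs rest hm inv
    have hc3 : c = 3 := by omega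
    subst hc3
    have hg : gElim M m r 3 piv = (M, r, piv) := by
      rw [gElim.eq_def]
      split <;> simp
    have hfold : (List.range' 3 0).foldl bStep (pivs, rest) = (pivs, rest) := rfl
    rw [hg, hfold]
    exact ⟨inv, hm⟩
  | succ n ih =>
    intro c hc M m r piv pivs rest hm inv
    have hcl : c < 3 := by omega
    by_cases hr : r < m
    · cases hfB : rest.findIdx? (fun q : Int × Int => PySem.Int.band (q.1 >>> c) 1 != 0) with
      | none =>
        have hfA : pvFindPiv M r m c = none := by
          rw [← hm, findPiv_pair hcl rest r M inv.wf inv.len inv.restEq, hfB]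
          rfl
        have hg : gElim M m r c piv = gElim M m r (c+1) piv := by
          rw [gElim.eq_def]
          simp [hr, hcl, hfA]
        have hb : bStep (pivs, rest) c = (pivs, rest) := by
          unfold bStep
          rw [hfB]
        have hfold : (List.range' c (n+1)).foldl bStep (pivs, rest)
            = (List.range' (c+1) n).foldl bStep (pivs, rest) := by
          rw [List.range'_succ, List.foldl_cons, hb]
        rw [hg, hfold]
        refine ih (c+1) (by omega) M m r piv pivs rest hm
          ⟨inv.wf, inv.len, inv.plen, inv.pivlen, by omega, inv.restEq, inv.pivEq,
            (fun k hk => by have := inv.colLt k hk; omega), inv.pivIdx, inv.pivNone, ?_,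
            inv.ownBit, inv.othBit⟩
        intro t ht j hj
        rcases Nat.lt_or_ge j c with hjc | hjc
        · exact inv.restLow t ht j hjc
        · have hjc' : j = c := by omega
          subst hjc'
          have hmem : rest.getD t (0,0) ∈ rest := by
            rw [List.getD_eq_getElem _ _ ht]
            exact List.getElem_mem ht
          have hx := List.findIdx?_eq_none_iff.mp hfB _ hmem
          have hx' : PySem.Int.band ((rest.getD t (0,0)).1 >>> j) 1 = 0 := by
            simpa using hx
          exact hx'
      | some idx =>
        obtain ⟨hidx, hcnd, -⟩ := List.findIdx?_eq_some_iff_getElem.mp hfB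
        have hmrl : m = r + rest.length := by rw [← hm]; exact inv.len
        have hpenc : rest.getD idx (0,0) = enc (pvRow M (r + idx)) := inv.restEq idx hidx
        have hbitp : pvBitf c (rest.getD idx (0,0)).1 = 1 := by
          rcases bitf01 c (rest.getD idx (0,0)).1 with h0|h1
          · exfalso
            have hpg : rest[idx] = rest.getD idx (0,0) := (List.getD_eq_getElem _ _ hidx).symm
            have hcnd' : (PySem.Int.band (rest[idx].1 >>> c) 1 != 0) = true := hcnd
            rw [hpg] at hcnd'
            rw [show PySem.Int.band ((rest.getD idx (0,0)).1 >>> c) 1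
                = pvBitf c (rest.getD idx (0,0)).1 from rfl, h0] at hcnd'
            simp at hcnd'
          · exact h1
        have hrm : r < M.length := by rw [hm]; exact hr
        have hprm : r + idx < M.length := by rw [hm]; omega
        have hPwf : RowWF (pvRow M (r+idx)) := rowWF_row inv.wf _ hprm
        have hplowp : ∀ j, j < c → pvBitf j (rest.getD idx (0,0)).1 = 0 :=
          fun j hj => inv.restLow idx hidx j hj
        have hplow : ∀ j, j < c → pvBitf j (enc (pvRow M (r+idx))).1 = 0 := by
          intro j hj
          rw [← hpenc]
          exact hplowp j hj
        have hfA : pvFindPiv M r m c = some (r + idx) := by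
          rw [← hm, findPiv_pair hcl rest r M inv.wf inv.len inv.restEq, hfB]
          rfl
        have hg : gElim M m r c piv
            = gElim (pvElimCol (pvSwap M r (r+idx)) m r c) m (r+1) (c+1) (piv.set c (r:Int)) := by
          rw [gElim.eq_def]
          simp [hr, hcl, hfA]
        have hM1len : (pvSwap M r (r+idx)).length = M.length := pvSwap_len M r (r+idx)
        have hM1wf : MatWF (pvSwap M r (r+idx)) := (swap_wf inv.wf hrm hprm).1
        have hrow1 := pvRow_swap hrm hprm
        have hrow1r : pvRow (pvSwap M r (r+idx)) r = pvRow M (r+idx) := by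
          rw [hrow1 r, if_pos rfl]
        have hM2p := elimCol_rows (M := pvSwap M r (r+idx)) (m := m) (r := r) (c := c)
          (by rw [hM1len, hm])
        have hM2len : (pvElimCol (pvSwap M r (r+idx)) m r c).length = m := hM2p.1
        have hM2wf : MatWF (pvElimCol (pvSwap M r (r+idx)) m r c) :=
          elimCol_wf hM1wf (by rw [hM1len, hm]) hr hcl
        have hM2rowR : pvRow (pvElimCol (pvSwap M r (r+idx)) m r c) r = pvRow M (r+idx) := by
          rw [hM2p.2 r, if_neg (fun h => h.2.1 rfl), hrow1r]
        have hM2rowNe : ∀ k, k ≠ r → k < m →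
            pvRow (pvElimCol (pvSwap M r (r+idx)) m r c) k
            = (if PySem.Int.band ((pvRow (pvSwap M r (r+idx)) k).getD c 0) 1 ≠ 0
               then pvXorFrom c (pvRow (pvSwap M r (r+idx)) k) (pvRow M (r+idx))
               else pvRow (pvSwap M r (r+idx)) k) := by
          intro k hkne hkm
          rw [hM2p.2 k]
          by_cases hcb : PySem.Int.band ((pvRow (pvSwap M r (r+idx)) k).getD c 0) 1 ≠ 0
          · rw [if_pos ⟨hkm, hkne, hcb⟩, if_pos hcb, hrow1r]
          · rw [if_neg (fun h => hcb h.2.2), if_neg hcb]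
        have hM2enc : ∀ k, k ≠ r → k < m →
            enc (pvRow (pvElimCol (pvSwap M r (r+idx)) m r c) k)
            = bRedc c (rest.getD idx (0,0)) (enc (pvRow (pvSwap M r (r+idx)) k)) := by
          intro k hkne hkm
          have hwfk : RowWF (pvRow (pvSwap M r (r+idx)) k) :=
            rowWF_row hM1wf _ (by rw [hM1len, hm]; exact hkm)
          rw [hM2rowNe k hkne hkm, (redc_comm hwfk hPwf hcl hplow).1, ← hpenc]
        have hbs : bStep (pivs, rest) c
            = (pivs.map (fun pr => (pr.1, bRedc c (rest.getD idx (0,0)) pr.2)) ++ [(c, rest.getD idx (0,0))],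
               ((rest.set idx (rest.getD 0 (0,0))).drop 1).map (bRedc c (rest.getD idx (0,0)))) := by
          unfold bStep
          rw [hfB]
        have hfold : (List.range' c (n+1)).foldl bStep (pivs, rest)
            = (List.range' (c+1) n).foldl bStep
                (pivs.map (fun pr => (pr.1, bRedc c (rest.getD idx (0,0)) pr.2)) ++ [(c, rest.getD idx (0,0))],
                 ((rest.set idx (rest.getD 0 (0,0))).drop 1).map (bRedc c (rest.getD idx (0,0)))) := by
          rw [List.range'_succ, List.foldl_cons, hbs]
        have hget' : ∀ k, k < r →
            (pivs.map (fun pr => (pr.1, bRedc c (rest.getD idx (0,0)) pr.2)) ++ [(c, rest.getD idx (0,0))]).getD k (0,0,0)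
            = ((pivs.getD k (0,0,0)).1, bRedc c (rest.getD idx (0,0)) (pivs.getD k (0,0,0)).2) := by
          intro k hk
          rw [getD_append_lt _ _ (by simp [inv.plen]; exact hk) _,
              getD_map_lt _ _ (by rw [inv.plen]; exact hk) (0,0,0) (0,0,0)]
        have hgetr : (pivs.map (fun pr => (pr.1, bRedc c (rest.getD idx (0,0)) pr.2)) ++ [(c, rest.getD idx (0,0))]).getD r (0,0,0)
            = (c, rest.getD idx (0,0)) := by
          have hmaplen : (pivs.map (fun pr => (pr.1, bRedc c (rest.getD idx (0,0)) pr.2))).length = r := by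
            simp [inv.plen]
          have h := getD_concat_len (pivs.map (fun pr => (pr.1, bRedc c (rest.getD idx (0,0)) pr.2)))
            (c, rest.getD idx (0,0)) (0,0,0)
          rw [hmaplen] at h
          exact h
        have hmid : ∀ t, t < rest.length - 1 →
            ((rest.set idx (rest.getD 0 (0,0))).drop 1).getD t (0,0)
              = enc (pvRow (pvSwap M r (r+idx)) (r+1+t)) := by
          intro t ht
          rw [getD_drop1]
          by_cases hti : 1 + t = idx
          · have hrow : pvRow (pvSwap M r (r+idx)) (r+1+t) = pvRow M r := by
              rw [hrow1 (r+1+t), if_neg (by omega), if_pos (by omega)]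
            rw [show (1+t) = idx from hti, getD_set_self' rest hidx, hrow]
            have h := inv.restEq 0 (by omega)
            simpa using h
          · have hrow : pvRow (pvSwap M r (r+idx)) (r+1+t) = pvRow M (r+1+t) := by
              rw [hrow1 (r+1+t), if_neg (by omega), if_neg (by omega)]
            rw [getD_set_ne' rest (fun h => hti h.symm), hrow]
            have h := inv.restEq (1+t) (by omega)
            have he : r + (1+t) = r+1+t := by omega
            rw [he] at h
            exact h
        have hrestlen : (((rest.set idx (rest.getD 0 (0,0))).drop 1).map (bRedc c (rest.getD idx (0,0)))).length
            = rest.length - 1 := by simp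
        have hrestEq' : ∀ t, t < (((rest.set idx (rest.getD 0 (0,0))).drop 1).map (bRedc c (rest.getD idx (0,0)))).length →
            (((rest.set idx (rest.getD 0 (0,0))).drop 1).map (bRedc c (rest.getD idx (0,0)))).getD t (0,0)
              = enc (pvRow (pvElimCol (pvSwap M r (r+idx)) m r c) (r+1+t)) := by
          intro t ht
          rw [hrestlen] at ht
          rw [getD_map_lt (bRedc c (rest.getD idx (0,0))) _ (by simp; omega) (0,0) (0,0), hmid t ht,
              hM2enc (r+1+t) (by omega) (by omega)]
        have hrestNN : ∀ s, s < rest.length → 0 ≤ (rest.getD s (0,0)).1 := by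
          intro s hs
          rw [inv.restEq s hs]
          exact (row_enc (rowWF_row inv.wf (r+s) (by rw [inv.len]; simp; omega))).2.1
        have hpNN : 0 ≤ (rest.getD idx (0,0)).1 := hrestNN idx hidx
        have hpivNN : ∀ k, k < r → 0 ≤ (pivs.getD k (0,0,0)).2.1 := by
          intro k hk
          rw [inv.pivEq k hk]
          exact (row_enc (rowWF_row inv.wf k (by rw [inv.len]; omega))).2.1
        have hpivEq' : ∀ k, k < r+1 →
            ((pivs.map (fun pr => (pr.1, bRedc c (rest.getD idx (0,0)) pr.2)) ++ [(c, rest.getD idx (0,0))]).getD k (0,0,0)).2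
              = enc (pvRow (pvElimCol (pvSwap M r (r+idx)) m r c) k) := by
          intro k hk
          rcases Nat.lt_or_ge k r with hkr | hkr
          · rw [hget' k hkr, hM2enc k (by omega) (by omega)]
            show bRedc c (rest.getD idx (0,0)) (pivs.getD k (0,0,0)).2
              = bRedc c (rest.getD idx (0,0)) (enc (pvRow (pvSwap M r (r+idx)) k))
            rw [inv.pivEq k hkr, hrow1 k, if_neg (by omega), if_neg (by omega)]
          · have hke : k = r := by omega
            rw [hke, hgetr]
            show rest.getD idx (0,0) = enc (pvRow (pvElimCol (pvSwap M r (r+idx)) m r c) r)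
            rw [hM2rowR]
            exact hpenc
        have hcolLt' : ∀ k, k < r+1 →
            ((pivs.map (fun pr => (pr.1, bRedc c (rest.getD idx (0,0)) pr.2)) ++ [(c, rest.getD idx (0,0))]).getD k (0,0,0)).1 < c+1 := by
          intro k hk
          rcases Nat.lt_or_ge k r with hkr | hkr
          · rw [hget' k hkr]
            have := inv.colLt k hkr
            show (pivs.getD k (0,0,0)).1 < c+1
            omega
          · have hke : k = r := by omega
            rw [hke, hgetr]
            exact Nat.lt_succ_self c
        have hpivIdx' : ∀ k, k < r+1 →
            (piv.set c (r:Int)).getD ((pivs.map (fun pr => (pr.1, bRedc c (rest.getD idx (0,0)) pr.2)) ++ [(c, rest.getD idx (0,0))]).getD k (0,0,0)).1 0 = (k:Int) := by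
          intro k hk
          rcases Nat.lt_or_ge k r with hkr | hkr
          · rw [hget' k hkr]
            show (piv.set c (r:Int)).getD (pivs.getD k (0,0,0)).1 0 = (k:Int)
            have hcol := inv.colLt k hkr
            rw [getD_set_ne' piv (by omega) _ _]
            exact inv.pivIdx k hkr
          · have hke : k = r := by omega
            rw [hke, hgetr]
            show (piv.set c (r:Int)).getD c 0 = (r:Int)
            rw [getD_set_self' piv (by rw [inv.pivlen]; exact hcl) _ _]
        have hpivNone' : ∀ j, j < 3 →
            (∀ k, k < r+1 → ((pivs.map (fun pr => (pr.1, bRedc c (rest.getD idx (0,0)) pr.2)) ++ [(c, rest.getD idx (0,0))]).getD k (0,0,0)).1 ≠ j) →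
            (piv.set c (r:Int)).getD j 0 = -1 := by
          intro j hj hno
          have hjc : c ≠ j := by
            have h := hno r (Nat.lt_succ_self r)
            rw [hgetr] at h
            exact h
          rw [getD_set_ne' piv hjc _ _]
          refine inv.pivNone j hj ?_
          intro k hk
          have h := hno k (by omega)
          rw [hget' k hk] at h
          exact h
        have hrestLow' : ∀ t, t < (((rest.set idx (rest.getD 0 (0,0))).drop 1).map (bRedc c (rest.getD idx (0,0)))).length →
            ∀ j, j < c+1 →
            pvBitf j ((((rest.set idx (rest.getD 0 (0,0))).drop 1).map (bRedc c (rest.getD idx (0,0)))).getD t (0,0)).1 = 0 := by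
          intro t ht j hj
          rw [hrestlen] at ht
          obtain ⟨s, hs, hqs⟩ : ∃ s, s < rest.length ∧
              ((rest.set idx (rest.getD 0 (0,0))).drop 1).getD t (0,0) = rest.getD s (0,0) := by
            by_cases hti : 1 + t = idx
            · exact ⟨0, by omega, by rw [getD_drop1, show 1+t = idx from hti, getD_set_self' rest hidx]⟩
            · exact ⟨1+t, by omega, by rw [getD_drop1, getD_set_ne' rest (fun h => hti h.symm)]⟩
          rw [getD_map_lt (bRedc c (rest.getD idx (0,0))) _ (by simp; omega) (0,0) (0,0), hqs]
          rcases Nat.lt_or_ge j c with hjc | hjc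
          · rw [bRedc_bitl (hrestNN s hs) hpNN (hplowp j hjc)]
            exact inv.restLow s hs j hjc
          · have hje : j = c := by omega
            subst hje
            exact bRedc_bitc (hrestNN s hs) hpNN hbitp
        have hownBit' : ∀ k, k < r+1 →
            pvBitf ((pivs.map (fun pr => (pr.1, bRedc c (rest.getD idx (0,0)) pr.2)) ++ [(c, rest.getD idx (0,0))]).getD k (0,0,0)).1
              ((pivs.map (fun pr => (pr.1, bRedc c (rest.getD idx (0,0)) pr.2)) ++ [(c, rest.getD idx (0,0))]).getD k (0,0,0)).2.1 = 1 := by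
          intro k hk
          rcases Nat.lt_or_ge k r with hkr | hkr
          · rw [hget' k hkr]
            show pvBitf (pivs.getD k (0,0,0)).1 (bRedc c (rest.getD idx (0,0)) (pivs.getD k (0,0,0)).2).1 = 1
            rw [bRedc_bitl (hpivNN k hkr) hpNN (hplowp _ (inv.colLt k hkr))]
            exact inv.ownBit k hkr
          · have hke : k = r := by omega
            rw [hke, hgetr]
            exact hbitp
        have hothBit' : ∀ k k', k < r+1 → k' < r+1 → k ≠ k' →
            pvBitf ((pivs.map (fun pr => (pr.1, bRedc c (rest.getD idx (0,0)) pr.2)) ++ [(c, rest.getD idx (0,0))]).getD k' (0,0,0)).1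
              ((pivs.map (fun pr => (pr.1, bRedc c (rest.getD idx (0,0)) pr.2)) ++ [(c, rest.getD idx (0,0))]).getD k (0,0,0)).2.1 = 0 := by
          intro k k' hk hk' hkk
          rcases Nat.lt_or_ge k r with hkr | hkr
          · rcases Nat.lt_or_ge k' r with hkr' | hkr'
            · rw [hget' k hkr, hget' k' hkr']
              show pvBitf (pivs.getD k' (0,0,0)).1 (bRedc c (rest.getD idx (0,0)) (pivs.getD k (0,0,0)).2).1 = 0
              rw [bRedc_bitl (hpivNN k hkr) hpNN (hplowp _ (inv.colLt k' hkr'))]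
              exact inv.othBit k k' hkr hkr' hkk
            · have hke : k' = r := by omega
              rw [hke, hget' k hkr, hgetr]
              show pvBitf c (bRedc c (rest.getD idx (0,0)) (pivs.getD k (0,0,0)).2).1 = 0
              exact bRedc_bitc (hpivNN k hkr) hpNN hbitp
          · have hke : k = r := by omega
            have hkr' : k' < r := by omega
            rw [hke, hgetr, hget' k' hkr']
            show pvBitf (pivs.getD k' (0,0,0)).1 (rest.getD idx (0,0)).1 = 0
            exact hplowp _ (inv.colLt k' hkr')
        rw [hg, hfold]
        exact ih (c+1) (by omega) _ m (r+1) _ _ _ hM2len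
          ⟨hM2wf,
           by rw [hM2len]; simp only [List.length_map, List.length_drop, List.length_set]; omega,
           by simp [inv.plen],
           by simp [inv.pivlen],
           by omega,
           hrestEq', hpivEq', hcolLt', hpivIdx', hpivNone', hrestLow', hownBit', hothBit'⟩
    · have hl0 : rest.length = 0 := by
        have h1 := inv.len
        omega
      have hrest0 : rest = [] := List.eq_nil_of_length_eq_zero hl0
      subst hrest0
      have hgv : gElim M m r c piv = (M, r, piv) := by
        rw [gElim.eq_def]
        simp [hr]
      rw [hgv, foldl_bStep_nil]
      refine ⟨⟨inv.wf, inv.len, inv.plen, inv.pivlen, by omega, ?_, inv.pivEq,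
        (fun k hk => lt_of_lt_of_le (inv.colLt k hk) inv.hc3), inv.pivIdx, inv.pivNone, ?_,
        inv.ownBit, inv.othBit⟩, hm⟩
      · intro t ht
        exact absurd ht (by simp)
      · intro t ht
        exact absurd ht (by simp)

theorem contra_pair : ∀ (rest : List (Int × Int)) (r : Nat) (M : List (List Int)),
    MatWF M → M.length = r + rest.length →
    (∀ t, t < rest.length → rest.getD t (0,0) = enc (pvRow M (r+t))) →
    (∀ t, t < rest.length → ∀ j, j < 3 → pvBitf j (rest.getD t (0,0)).1 = 0) →
    pvContraM M M.length r = rest.any (fun q => q.2 != 0) := by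
  intro rest
  induction rest with
  | nil =>
    intro r M hWF hlen hrest hlow
    unfold pvContraM
    rw [show M.length - r = 0 by simp at hlen; omega]
    rfl
  | cons q qs ih =>
    intro r M hWF hlen hrest hlow
    have hlen' : M.length = r + (qs.length + 1) := by simpa using hlen
    have hrM : r < M.length := by omega
    have hq : q = enc (pvRow M r) := by
      have h := hrest 0 (by simp)
      simpa using h
    have hre := row_enc (rowWF_row hWF r hrM)
    have hej : ∀ j, j < 3 → pvEntry M r j = 0 := by
      intro j hj
      rw [pvEntry_eq, ← hre.1 j hj, ← hq]
      exact hlow 0 (by simp) j hj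
    have he3 : pvEntry M r 3 = q.2 := by
      rw [pvEntry_eq, ← hre.2.2.2.1, ← hq]
    have htail := ih (r+1) M hWF (by omega)
      (fun t ht => by
        have h := hrest (t+1) (by simp; omega)
        rw [List.getD_cons_succ] at h
        have he : r + (t+1) = r+1+t := by omega
        rw [he] at h
        exact h)
      (fun t ht j hj => by
        have h := hlow (t+1) (by simp; omega) j hj
        rw [List.getD_cons_succ] at h
        exact h)
    unfold pvContraM at htail ⊢
    rw [show M.length - r = qs.length + 1 by omega, List.range'_succ, List.any_cons,
        hej 0 (by omega), hej 1 (by omega), hej 2 (by omega), he3]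
    rw [show M.length - (r+1) = qs.length by omega] at htail
    rw [htail, List.any_cons]
    have hh : ((PySem.Int.bor (PySem.Int.bor 0 0) 0 == 0) && (q.2 != 0)) = (q.2 != 0) := by
      have hb : PySem.Int.bor (PySem.Int.bor (0:Int) 0) 0 = 0 := by decide
      rw [hb]
      simp
    rw [hh]

theorem inv_colsNodup {M : List (List Int)} {r c : Nat} {piv : List Int}
    {pivs : List (Nat × Int × Int)} {rest : List (Int × Int)}
    (inv : SimInv M r c piv pivs rest) : (pivs.map (·.1)).Nodup := by
  refine List.pairwise_iff_getElem.mpr ?_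
  intro i j hi hj hij
  simp only [List.getElem_map]
  intro heq
  have hi' : i < pivs.length := by simpa using hi
  have hj' : j < pivs.length := by simpa using hj
  have hg : ∀ k (h : k < pivs.length), pivs.getD k (0,0,0) = pivs[k] :=
    fun k h => List.getD_eq_getElem _ _ h
  have hown := inv.ownBit j (by rw [← inv.plen]; exact hj')
  have hoth := inv.othBit j i (by rw [← inv.plen]; exact hj') (by rw [← inv.plen]; exact hi')
    (by omega)
  rw [hg j hj'] at hown
  rw [hg j hj', hg i hi'] at hoth
  rw [heq] at hoth
  rw [hoth] at hown
  exact absurd hown (by norm_num)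

def pickY (pivs : List (Nat × Int × Int)) (j : Nat) : Int :=
  match pivs.find? (fun pr => pr.1 == j) with
  | some pr => pr.2.2
  | none => 0

theorem pickY_none {pivs : List (Nat × Int × Int)} {j : Nat}
    (h : ∀ k, k < pivs.length → (pivs.getD k (0,0,0)).1 ≠ j) : pickY pivs j = 0 := by
  unfold pickY
  have hn : pivs.find? (fun pr => pr.1 == j) = none := List.find?_eq_none.mpr (by
    intro a ha
    obtain ⟨ka, hka, hae⟩ := List.getElem_of_mem ha
    have hh := h ka hka
    rw [List.getD_eq_getElem _ _ hka, hae] at hh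
    simpa using hh)
  rw [hn]

theorem find_col {pivs : List (Nat × Int × Int)} (hnd : (pivs.map (·.1)).Nodup)
    {k j : Nat} (hk : k < pivs.length) (hcol : (pivs.getD k (0,0,0)).1 = j) :
    pivs.find? (fun pr => pr.1 == j) = some (pivs.getD k (0,0,0)) := by
  have hkel : pivs.getD k (0,0,0) = pivs[k] := List.getD_eq_getElem _ _ hk
  have hmem : pivs[k] ∈ pivs := List.getElem_mem hk
  have hsome : (pivs.find? (fun pr => pr.1 == j)).isSome := by
    rw [List.find?_isSome]
    refine ⟨pivs[k], hmem, ?_⟩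
    rw [← hkel]
    simp only [beq_iff_eq]
    exact hcol
  obtain ⟨a, ha⟩ := Option.isSome_iff_exists.mp hsome
  have hamem := List.mem_of_find?_eq_some ha
  have hap := List.find?_some ha
  have haj : a.1 = j := by simpa using hap
  obtain ⟨ka, hka, hae⟩ := List.getElem_of_mem hamem
  have hkk : ka = k := by
    have h1 : (pivs.map (·.1))[ka]'(by simpa using hka) = (pivs.map (·.1))[k]'(by simpa using hk) := by
      simp only [List.getElem_map]
      rw [hae, haj, ← hcol, hkel]
    exact (List.Nodup.getElem_inj_iff hnd).mp h1
  subst hkk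
  rw [ha, ← hae, hkel]

theorem pickY_some {pivs : List (Nat × Int × Int)} (hnd : (pivs.map (·.1)).Nodup)
    {k j : Nat} (hk : k < pivs.length) (hcol : (pivs.getD k (0,0,0)).1 = j) :
    pickY pivs j = (pivs.getD k (0,0,0)).2.2 := by
  unfold pickY
  rw [find_col hnd hk hcol]

theorem readoff_getD : ∀ (pivs : List (Nat × Int × Int)) (x : List Int),
    (pivs.map (·.1)).Nodup → (∀ pr ∈ pivs, pr.1 < x.length) → ∀ j,
    ((pivs.foldl (fun x pr => x.set pr.1 pr.2.2) x).getD j 0 =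
      match pivs.find? (fun pr => pr.1 == j) with
      | some pr => pr.2.2
      | none => x.getD j 0)
    ∧ (pivs.foldl (fun x pr => x.set pr.1 pr.2.2) x).length = x.length := by
  intro pivs
  induction pivs with
  | nil =>
    intro x _ _ j
    exact ⟨rfl, rfl⟩
  | cons pr ps ih =>
    intro x hnd hlt j
    rw [List.map_cons] at hnd
    obtain ⟨hnotin, hnd'⟩ := List.nodup_cons.mp hnd
    have hprlt : pr.1 < x.length := hlt pr List.mem_cons_self
    simp only [List.foldl_cons]
    have hih := ih (x.set pr.1 pr.2.2) hnd'
      (fun a ha => by rw [List.length_set]; exact hlt a (List.mem_cons_of_mem _ ha)) j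
    rw [List.find?_cons]
    by_cases hbeq : (pr.1 == j) = true
    · rw [hbeq]
      have hj : pr.1 = j := by simpa using hbeq
      have hfnone : ps.find? (fun pr2 => pr2.1 == j) = none := by
        rw [List.find?_eq_none]
        intro a ha hpa
        have haj : a.1 = j := by simpa using hpa
        exact hnotin (by rw [hj, ← haj]; exact List.mem_map_of_mem ha)
      refine ⟨?_, by rw [hih.2, List.length_set]⟩
      rw [hih.1, hfnone]
      rw [← hj, getD_set_self' x hprlt]
    · have hbf : (pr.1 == j) = false := by
        cases h : (pr.1 == j)
        · rfl
        · exact absurd h hbeq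
      rw [hbf]
      have hj : pr.1 ≠ j := by simpa using hbf
      refine ⟨?_, by rw [hih.2, List.length_set]⟩
      rw [hih.1]
      cases hps : ps.find? (fun pr2 => pr2.1 == j) with
      | some a => rfl
      | none => exact getD_set_ne' x hj _ _

theorem inv_entry {M : List (List Int)} {r : Nat} {piv : List Int}
    {pivs : List (Nat × Int × Int)} {rest : List (Int × Int)}
    (inv : SimInv M r 3 piv pivs rest) {k : Nat} (hk : k < r) :
    (∀ t, t < 3 → pvEntry M k t = pvBitf t (pivs.getD k (0,0,0)).2.1) ∧
    pvEntry M k 3 = (pivs.getD k (0,0,0)).2.2 := by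
  have hkM : k < M.length := by rw [inv.len]; omega
  have hre := row_enc (rowWF_row inv.wf k hkM)
  have he := inv.pivEq k hk
  constructor
  · intro t ht
    rw [pvEntry_eq, he, hre.1 t ht]
  · rw [pvEntry_eq, he, hre.2.2.2.1]

theorem back_term {M : List (List Int)} {r : Nat} {piv : List Int}
    {pivs : List (Nat × Int × Int)} {rest : List (Int × Int)}
    (inv : SimInv M r 3 piv pivs rest) {k t : Nat} (hk : k < r) (ht : t < 3)
    (hne : (pivs.getD k (0,0,0)).1 ≠ t) (s : Int) :
    (if PySem.Int.band (pvEntry M k t) 1 ≠ 0 then PySem.Int.bxor s (pickY pivs t) else s) = s := by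
  have hent := (inv_entry inv hk).1 t ht
  by_cases hp : ∃ k', k' < r ∧ (pivs.getD k' (0,0,0)).1 = t
  · obtain ⟨k', hk', hcol'⟩ := hp
    have hkk' : k ≠ k' := fun he => hne (he ▸ hcol')
    have hbit := inv.othBit k k' hk hk' hkk'
    rw [hcol'] at hbit
    rw [if_neg (by rw [hent, hbit]; decide)]
  · push_neg at hp
    have hzero : pickY pivs t = 0 :=
      pickY_none (fun k2 hk2 => hp k2 (by rwa [inv.plen] at hk2))
    rw [hzero]
    by_cases hc : PySem.Int.band (pvEntry M k t) 1 ≠ 0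
    · rw [if_pos hc, PySem.Int.bxor_zero]
    · rw [if_neg hc]

theorem back_eval {M : List (List Int)} {r : Nat} {piv : List Int}
    {pivs : List (Nat × Int × Int)} {rest : List (Int × Int)}
    (inv : SimInv M r 3 piv pivs rest) :
    pvBackM M piv = [pickY pivs 0, pickY pivs 1, pickY pivs 2] := by
  have hnd := inv_colsNodup inv
  have hjcase : ∀ j, j < 3 →
      (piv.getD j 0 = -1 ∧ pickY pivs j = 0) ∨
      (∃ k, k < r ∧ piv.getD j 0 = (k : Int) ∧ (pivs.getD k (0,0,0)).1 = j ∧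
        pickY pivs j = (pivs.getD k (0,0,0)).2.2) := by
    intro j hj
    by_cases hp : ∃ k, k < r ∧ (pivs.getD k (0,0,0)).1 = j
    · obtain ⟨k, hk, hcol⟩ := hp
      exact Or.inr ⟨k, hk, by rw [← hcol]; exact inv.pivIdx k hk, hcol,
        pickY_some hnd (by rw [inv.plen]; exact hk) hcol⟩
    · push_neg at hp
      exact Or.inl ⟨inv.pivNone j hj hp,
        pickY_none (fun k hk => hp k (by rwa [inv.plen] at hk))⟩
  unfold pvBackM
  simp only [List.foldl_cons, List.foldl_nil]
  have hx2 : (if piv.getD 2 0 ≠ -1 then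
        ([0,0,0] : List Int).set 2 ((List.range' 3 0).foldl
          (fun t kk => if PySem.Int.band (pvEntry M (piv.getD 2 0).toNat kk) 1 ≠ 0
            then PySem.Int.bxor t (([0,0,0] : List Int).getD kk 0) else t)
          (pvEntry M (piv.getD 2 0).toNat 3))
      else ([0,0,0] : List Int)) = [0, 0, pickY pivs 2] := by
    rcases hjcase 2 (by omega) with ⟨hm1, hz⟩ | ⟨k, hk, hpv, hcol, hy⟩
    · rw [if_neg (by rw [hm1]; exact fun h => h rfl), hz]
    · rw [if_pos (by rw [hpv]; intro h; omega), hpv]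
      simp only [Int.toNat_natCast]
      rw [(inv_entry inv hk).2, ← hy]
      rfl
  rw [hx2]
  have hx1 : (if piv.getD 1 0 ≠ -1 then
        ([0, 0, pickY pivs 2] : List Int).set 1 ((List.range' 2 1).foldl
          (fun t kk => if PySem.Int.band (pvEntry M (piv.getD 1 0).toNat kk) 1 ≠ 0
            then PySem.Int.bxor t (([0, 0, pickY pivs 2] : List Int).getD kk 0) else t)
          (pvEntry M (piv.getD 1 0).toNat 3))
      else ([0, 0, pickY pivs 2] : List Int)) = [0, pickY pivs 1, pickY pivs 2] := by
    rcases hjcase 1 (by omega) with ⟨hm1, hz⟩ | ⟨k, hk, hpv, hcol, hy⟩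
    · rw [if_neg (by rw [hm1]; exact fun h => h rfl), hz]
    · rw [if_pos (by rw [hpv]; intro h; omega)]
      have hK : (piv.getD 1 0).toNat = k := by rw [hpv]; exact Int.toNat_natCast k
      have hkK : (piv.getD 1 0).toNat < r := by rw [hK]; exact hk
      have hneK : (pivs.getD (piv.getD 1 0).toNat (0,0,0)).1 ≠ 2 := by rw [hK, hcol]; omega
      have hr2 : List.range' 2 1 = [2] := rfl
      rw [hr2]
      simp only [List.foldl_cons, List.foldl_nil]
      have hgd : ([0, 0, pickY pivs 2] : List Int).getD 2 0 = pickY pivs 2 := rfl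
      rw [hgd, back_term inv hkK (t := 2) (by omega) hneK (pvEntry M (piv.getD 1 0).toNat 3),
        hK, (inv_entry inv hk).2, ← hy]
      rfl
  rw [hx1]
  rcases hjcase 0 (by omega) with ⟨hm1, hz⟩ | ⟨k, hk, hpv, hcol, hy⟩
  · rw [if_neg (by rw [hm1]; exact fun h => h rfl), hz]
  · rw [if_pos (by rw [hpv]; intro h; omega)]
    have hK : (piv.getD 0 0).toNat = k := by rw [hpv]; exact Int.toNat_natCast k
    have hkK : (piv.getD 0 0).toNat < r := by rw [hK]; exact hk
    have hne1 : (pivs.getD (piv.getD 0 0).toNat (0,0,0)).1 ≠ 1 := by rw [hK, hcol]; omega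
    have hne2 : (pivs.getD (piv.getD 0 0).toNat (0,0,0)).1 ≠ 2 := by rw [hK, hcol]; omega
    have hr2 : List.range' 1 2 = [1, 2] := rfl
    rw [hr2]
    simp only [List.foldl_cons, List.foldl_nil]
    have hgd1 : ([0, pickY pivs 1, pickY pivs 2] : List Int).getD 1 0 = pickY pivs 1 := rfl
    have hgd2 : ([0, pickY pivs 1, pickY pivs 2] : List Int).getD 2 0 = pickY pivs 2 := rfl
    rw [hgd1, back_term inv hkK (t := 1) (by omega) hne1 (pvEntry M (piv.getD 0 0).toNat 3), hgd2,
      back_term inv hkK (t := 2) (by omega) hne2 (pvEntry M (piv.getD 0 0).toNat 3),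
      hK, (inv_entry inv hk).2, ← hy]
    rfl

-- equation construction: B's pairs are the enc of the middle layer's rows
theorem bInner_comm (ref : List (String × Int)) :
    ∀ (rest : List (List (String × Int))) (E : List (List Int)) (eqs : List (Int × Int)),
    eqs = E.map enc →
    rest.foldl (fun e g =>
      let mv := PySem.Int.bxor (pvGet g "addr") (pvGet ref "addr")
      if mv = 0 then e else
      e ++ [(PySem.Int.mod mv 8,
             PySem.Int.mod (PySem.Int.bxor (pvGet g "cw16") (pvGet ref "cw16")) 65536)]) eqs
    = (rest.foldl (fun e2 g =>
      let mv := PySem.Int.bxor (pvGet g "addr") (pvGet ref "addr")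
      if mv = 0 then e2 else
      e2 ++ [[PySem.Int.band mv 1, PySem.Int.band (mv >>> (1:Nat)) 1, PySem.Int.band (mv >>> (2:Nat)) 1,
              PySem.Int.mod (PySem.Int.bxor (pvGet g "cw16") (pvGet ref "cw16")) 65536]]) E).map enc := by
  intro rest
  induction rest with
  | nil =>
    intro E eqs h
    exact h
  | cons g rest ih =>
    intro E eqs h
    simp only [List.foldl_cons]
    by_cases hmv : PySem.Int.bxor (pvGet g "addr") (pvGet ref "addr") = 0
    · simp only [hmv, reduceIte]
      exact ih E eqs h
    · simp only [hmv, reduceIte]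
      apply ih
      rw [h, List.map_append]
      congr 1
      rw [List.map_singleton]
      have : enc [PySem.Int.band (PySem.Int.bxor (pvGet g "addr") (pvGet ref "addr")) 1,
          PySem.Int.band ((PySem.Int.bxor (pvGet g "addr") (pvGet ref "addr")) >>> (1:Nat)) 1,
          PySem.Int.band ((PySem.Int.bxor (pvGet g "addr") (pvGet ref "addr")) >>> (2:Nat)) 1,
          PySem.Int.mod (PySem.Int.bxor (pvGet g "cw16") (pvGet ref "cw16")) 65536]
          = (PySem.Int.mod (PySem.Int.bxor (pvGet g "addr") (pvGet ref "addr")) 8,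
             PySem.Int.mod (PySem.Int.bxor (pvGet g "cw16") (pvGet ref "cw16")) 65536) := by
        unfold enc
        simp only [List.getD_cons_zero, List.getD_cons_succ, Prod.mk.injEq]
        exact ⟨(mod8_bits _).symm, by trivial⟩
      rw [this]

theorem bEqs_comm (lst : List (List (String × Int))) (E : List (List Int)) (eqs : List (Int × Int))
    (h : eqs = E.map enc) : bEqs eqs lst = (pvStepM E lst).map enc := by
  unfold bEqs pvStepM
  by_cases h2 : lst.length < 2
  · rw [if_pos h2, if_pos h2]
    exact h
  · rw [if_neg h2, if_neg h2]
    cases lst with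
    | nil => exact h
    | cons ref rest => exact bInner_comm ref rest E eqs h

theorem eqs_comm : ∀ (L : List (List (List (String × Int)))) (E : List (List Int))
    (eqs : List (Int × Int)), eqs = E.map enc →
    L.foldl bEqs eqs = (L.foldl pvStepM E).map enc := by
  intro L
  induction L with
  | nil =>
    intro E eqs h
    exact h
  | cons lst L ih =>
    intro E eqs h
    simp only [List.foldl_cons]
    exact ih _ _ (bEqs_comm lst E eqs h)

theorem pvSolveMB (g : List (List (String × Int))) : pvSolveM g = pvSolveB g := by
  unfold pvSolveM pvSolveB
  have hWF : MatWF ((pvGroupBySpeed g).values.foldl pvStepM []) := by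
    rw [show (pvGroupBySpeed g).values = (pvGroupBySpeed g).items.map (·.2) from rfl, List.foldl_map]
    exact (items_comm (pvGroupBySpeed g).items [] [] [] rfl rfl (fun e he => by cases he)).2.2
  have hEq : (pvGroupBySpeed g).values.foldl bEqs []
      = ((pvGroupBySpeed g).values.foldl pvStepM []).map enc :=
    eqs_comm _ _ _ (by simp)
  rw [hEq]
  simp only [List.length_map]
  by_cases hlen : ((pvGroupBySpeed g).values.foldl pvStepM []).length < 3
  · rw [if_pos hlen, if_pos hlen]
  · rw [if_neg hlen, if_neg hlen]
    have hinv0 : SimInv ((pvGroupBySpeed g).values.foldl pvStepM []) 0 0 [-1,-1,-1] []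
        (((pvGroupBySpeed g).values.foldl pvStepM []).map enc) := by
      refine ⟨hWF, by simp, rfl, rfl, by omega, ?_, ?_, ?_, ?_, ?_, ?_, ?_, ?_⟩
      · intro t ht
        rw [getD_map_lt enc _ (by simpa using ht) (0,0) []]
        have h0 : 0 + t = t := Nat.zero_add t
        rw [h0]
        rfl
      · intro k hk
        omega
      · intro k hk
        omega
      · intro k hk
        omega
      · intro j hj _
        interval_cases j <;> rfl
      · intro t ht j hj
        omega
      · intro k hk
        omega
      · intro k k' hk hk' hkk
        omega
    have hsim := sim 3 0 rfl ((pvGroupBySpeed g).values.foldl pvStepM [])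
      ((pvGroupBySpeed g).values.foldl pvStepM []).length 0 [-1,-1,-1] []
      (((pvGroupBySpeed g).values.foldl pvStepM []).map enc) rfl hinv0
    obtain ⟨hinvF, hlenF⟩ := hsim
    have h012 : ([0,1,2] : List Nat) = List.range' 0 3 := rfl
    rw [h012]
    have hcontra : pvContraM
          (gElim ((pvGroupBySpeed g).values.foldl pvStepM [])
            ((pvGroupBySpeed g).values.foldl pvStepM []).length 0 0 [-1,-1,-1]).1
          ((pvGroupBySpeed g).values.foldl pvStepM []).length
          (gElim ((pvGroupBySpeed g).values.foldl pvStepM [])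
            ((pvGroupBySpeed g).values.foldl pvStepM []).length 0 0 [-1,-1,-1]).2.1
        = ((List.range' 0 3).foldl bStep
            (([] : List (Nat × Int × Int)),
             ((pvGroupBySpeed g).values.foldl pvStepM []).map enc)).2.any (fun q => q.2 != 0) := by
      have h := contra_pair
        ((List.range' 0 3).foldl bStep
          (([] : List (Nat × Int × Int)), ((pvGroupBySpeed g).values.foldl pvStepM []).map enc)).2
        (gElim ((pvGroupBySpeed g).values.foldl pvStepM [])
          ((pvGroupBySpeed g).values.foldl pvStepM []).length 0 0 [-1,-1,-1]).2.1
        (gElim ((pvGroupBySpeed g).values.foldl pvStepM [])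
          ((pvGroupBySpeed g).values.foldl pvStepM []).length 0 0 [-1,-1,-1]).1
        hinvF.wf hinvF.len hinvF.restEq (fun t ht j hj => hinvF.restLow t ht j hj)
      rw [hlenF] at h
      exact h
    rw [hcontra]
    by_cases hany : (((List.range' 0 3).foldl bStep
        (([] : List (Nat × Int × Int)),
         ((pvGroupBySpeed g).values.foldl pvStepM []).map enc)).2.any (fun q => q.2 != 0)) = true
    · rw [if_pos hany, if_pos hany]
    · rw [if_neg hany, if_neg hany]
      congr 1
      rw [back_eval hinvF]
      have hnd := inv_colsNodup hinvF
      have hlt : ∀ pr ∈ ((List.range' 0 3).foldl bStep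
          (([] : List (Nat × Int × Int)),
           ((pvGroupBySpeed g).values.foldl pvStepM []).map enc)).1,
          pr.1 < ([0,0,0] : List Int).length := by
        intro pr hpr
        obtain ⟨k, hk, hke⟩ := List.getElem_of_mem hpr
        have hcl := hinvF.colLt k (by rw [← hinvF.plen]; exact hk)
        rw [List.getD_eq_getElem _ _ hk, hke] at hcl
        simpa using hcl
      have hro := readoff_getD ((List.range' 0 3).foldl bStep
          (([] : List (Nat × Int × Int)),
           ((pvGroupBySpeed g).values.foldl pvStepM []).map enc)).1 [0,0,0] hnd hlt
      apply List.ext_getElem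
      · rw [(hro 0).2]
        simp
      · intro i h1 h2
        rw [← List.getD_eq_getElem _ 0 h2, (hro i).1]
        have hi3 : i < 3 := by simpa using h1
        interval_cases i <;> simp [pickY]

theorem pvSolve_eq (g : List (List (String × Int))) : pvSolveA g = pvSolveB g :=
  (pvSolveAM g).trans (pvSolveMB g)

-- ===== VERDICT (by name: the statement is the Claim_ definition above) =====
theorem separable_fit_spec : Claim_equal_separable_fit := by
  intro rows _ _
  unfold Spec_separable_fit separable_fit separable_fit_alt
  simp only [pvSolve_eq, pvGroup_filter]
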